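-- pv_equiv track=rewrite | github.com/Alevarias/kingdom-survival-game | island_generator.py | remove_edge_islands
-- ===== SOURCE A (Python) =====
-- def remove_edge_islands(grid, land_value=1, void_value=0):
--     """Removes any landmasses that touch the edge of the grid using BFS."""
--     from collections import deque
--     h = len(grid)
--     w = len(grid[0])
--     visited = [[False for _ in range(w)] for _ in range(h)]
--
--     def bfs_remove(start_x, start_y):
--         """BFS to find and remove all tiles connected to an edge tile."""
--         queue = deque([(start_x, start_y)])
--         visited[start_y][start_x] = True
--         to_remove = [(start_x, start_y)]
--
--         while queue:
--             x, y = queue.popleft()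
--
--             # Check 4 cardinal directions
--             for dx, dy in [(0, 1), (0, -1), (1, 0), (-1, 0)]:
--                 nx, ny = x + dx, y + dy
--                 if 0 <= nx < w and 0 <= ny < h:
--                     if not visited[ny][nx] and grid[ny][nx] == land_value:
--                         visited[ny][nx] = True
--                         queue.append((nx, ny))
--                         to_remove.append((nx, ny))
--
--         # Remove all tiles in this connected component
--         for rx, ry in to_remove:
--             grid[ry][rx] = void_value
--
--     # Check all edge tiles
--     edge_tiles = []
--
--     # Top and bottom edges
--     for x in range(w):
--         if grid[0][x] == land_value and not visited[0][x]:
--             edge_tiles.append((x, 0))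
--         if grid[h-1][x] == land_value and not visited[h-1][x]:
--             edge_tiles.append((x, h-1))
--
--     # Left and right edges
--     for y in range(h):
--         if grid[y][0] == land_value and not visited[y][0]:
--             edge_tiles.append((0, y))
--         if grid[y][w-1] == land_value and not visited[y][w-1]:
--             edge_tiles.append((w-1, y))
--
--     # Remove all edge-touching islands
--     for x, y in edge_tiles:
--         if not visited[y][x] and grid[y][x] == land_value:
--             bfs_remove(x, y)
--
--     return grid
-- ===== SOURCE B (Python) =====
-- def remove_edge_islands(grid, land_value=1, void_value=0):
--     """Removes edge-touching landmasses by iterated neighbor-propagation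
--     (Gauss-Seidel sweeps to a fixpoint) instead of per-component BFS.
--     Mutates grid in place, like the original."""
--     h = len(grid)
--     w = len(grid[0])
--     # seed: border land cells
--     mark = [[grid[y][x] == land_value and (y == 0 or y == h - 1 or x == 0 or x == w - 1)
--              for x in range(w)] for y in range(h)]
--     changed = True
--     while changed:
--         changed = False
--         for y in range(h):
--             for x in range(w):
--                 if not mark[y][x] and grid[y][x] == land_value:
--                     if ((y > 0 and mark[y - 1][x]) or (y + 1 < h and mark[y + 1][x])
--                             or (x > 0 and mark[y][x - 1]) or (x + 1 < w and mark[y][x + 1])):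
--                         mark[y][x] = True
--                         changed = True
--     for y in range(h):
--         for x in range(w):
--             if mark[y][x]:
--                 grid[y][x] = void_value
--     return grid
-- ===== Notes on version B (the rewrite author's own statement) =====
-- stated objective: alternative
-- what changed: Replaces the queue-based per-component BFS (with a visited matrix and per-island removal lists) by a whole-grid fixpoint computation: seed a Boolean mark matrix with border land cells, then make Gauss-Seidel sweeps over the grid propagating marks to adjacent land cells until a sweep changes nothing, and finally void every marked cell.
import Mathlib
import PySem

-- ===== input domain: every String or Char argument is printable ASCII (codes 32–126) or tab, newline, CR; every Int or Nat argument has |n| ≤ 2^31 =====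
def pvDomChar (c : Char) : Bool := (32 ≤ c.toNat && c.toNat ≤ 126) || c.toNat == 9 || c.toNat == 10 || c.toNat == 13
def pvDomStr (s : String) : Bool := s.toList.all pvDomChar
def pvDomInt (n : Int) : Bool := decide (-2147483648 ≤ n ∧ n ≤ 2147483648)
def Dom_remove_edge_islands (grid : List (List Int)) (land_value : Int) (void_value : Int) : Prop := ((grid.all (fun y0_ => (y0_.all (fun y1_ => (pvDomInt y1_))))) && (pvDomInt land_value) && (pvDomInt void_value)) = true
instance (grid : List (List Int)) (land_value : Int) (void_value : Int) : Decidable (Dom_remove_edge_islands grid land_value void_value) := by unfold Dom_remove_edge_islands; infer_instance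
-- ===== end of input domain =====

-- B replaces A's per-component BFS (queue + visited + per-island removal list) by a whole-grid
-- Gauss-Seidel fixpoint propagation of a Boolean mark matrix; the proved equivalence is about the
-- RETURN value (both Pythons also mutate `grid` in place, identically, by writing the final values).

-- shared 2-d helpers (Python's grid[y][x] reads/writes; always used in range here)
def pvGetD2 {α : Type} (d : α) (g : List (List α)) (y x : Nat) : α := (g.getD y []).getD x d
def pvGet2 (g : List (List Int)) (y x : Nat) : Int := pvGetD2 0 g y x
def pvGetB (v : List (List Bool)) (y x : Nat) : Bool := pvGetD2 false v y x
def pvSet2 {α : Type} (g : List (List α)) (y x : Nat) (a : α) : List (List α) :=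
  g.set y ((g.getD y []).set x a)

-- ===== PORT A =====
def pvDirs : List (Int × Int) := [(0,1),(0,-1),(1,0),(-1,0)]

-- one neighbour direction of the popped cell (x, y)
def pvBfsStep (g : List (List Int)) (land : Int) (w h : Int) (x y : Int)
    (s : List (Int × Int) × List (List Bool) × List (Int × Int)) (d : Int × Int) :
    List (Int × Int) × List (List Bool) × List (Int × Int) :=
  let nx := x + d.1
  let ny := y + d.2
  if 0 ≤ nx ∧ nx < w ∧ 0 ≤ ny ∧ ny < h then
    if ¬ (pvGetB s.2.1 ny.toNat nx.toNat = true) ∧ pvGet2 g ny.toNat nx.toNat = land then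
      (s.1 ++ [(nx, ny)], pvSet2 s.2.1 ny.toNat nx.toNat true, s.2.2 ++ [(nx, ny)])
    else s
  else s

-- `while queue:` (fuel only guards totality; it is never exhausted on admitted inputs)
def pvBfsLoop (g : List (List Int)) (land : Int) (w h : Int) :
    Nat → List (Int × Int) → List (List Bool) → List (Int × Int) →
    List (List Bool) × List (Int × Int)
  | 0, _, v, tr => (v, tr)
  | _ + 1, [], v, tr => (v, tr)
  | fuel + 1, c :: qs, v, tr =>
      let s := pvDirs.foldl (pvBfsStep g land w h c.1 c.2) (qs, v, tr)
      pvBfsLoop g land w h fuel s.1 s.2.1 s.2.2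

def pvBfsRemove (g : List (List Int)) (v : List (List Bool)) (land void : Int)
    (w h : Int) (fuel : Nat) (sx sy : Int) : List (List Int) × List (List Bool) :=
  let v1 := pvSet2 v sy.toNat sx.toNat true
  let r := pvBfsLoop g land w h fuel [(sx, sy)] v1 [(sx, sy)]
  (r.2.foldl (fun g c => pvSet2 g c.2.toNat c.1.toNat void) g, r.1)

def remove_edge_islands (grid : List (List Int)) (land_value : Int) (void_value : Int) : List (List Int) :=
  let h := grid.length
  let w := (grid.getD 0 []).length
  let visited : List (List Bool) := List.replicate h (List.replicate w false)
  let et1 := (List.range w).foldl (fun acc x => acc ++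
      ((if pvGet2 grid 0 x = land_value ∧ ¬ (pvGetB visited 0 x = true)
        then [((x : Int), (0 : Int))] else []) ++
       (if pvGet2 grid (h - 1) x = land_value ∧ ¬ (pvGetB visited (h - 1) x = true)
        then [((x : Int), ((h : Int) - 1))] else []))) []
  let edge_tiles := (List.range h).foldl (fun acc y => acc ++
      ((if pvGet2 grid y 0 = land_value ∧ ¬ (pvGetB visited y 0 = true)
        then [((0 : Int), (y : Int))] else []) ++
       (if pvGet2 grid y (w - 1) = land_value ∧ ¬ (pvGetB visited y (w - 1) = true)
        then [(((w : Int) - 1), (y : Int))] else []))) et1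
  let r := edge_tiles.foldl (fun (s : List (List Int) × List (List Bool)) c =>
      if ¬ (pvGetB s.2 c.2.toNat c.1.toNat = true) ∧ pvGet2 s.1 c.2.toNat c.1.toNat = land_value
      then pvBfsRemove s.1 s.2 land_value void_value (w : Int) (h : Int) (2 * h * w + 1) c.1 c.2
      else s) (grid, visited)
  r.1

-- ===== PORT B =====
def pvMarkInit (g : List (List Int)) (land : Int) (h w : Nat) : List (List Bool) :=
  (List.range h).map (fun y => (List.range w).map (fun x =>
    decide (pvGet2 g y x = land ∧ (y = 0 ∨ y = h - 1 ∨ x = 0 ∨ x = w - 1))))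

def pvSweepCell (g : List (List Int)) (land : Int) (h w : Nat)
    (s : List (List Bool) × Bool) (y x : Nat) : List (List Bool) × Bool :=
  if ¬ (pvGetB s.1 y x = true) ∧ pvGet2 g y x = land ∧
     ((0 < y ∧ pvGetB s.1 (y - 1) x = true) ∨ (y + 1 < h ∧ pvGetB s.1 (y + 1) x = true) ∨
      (0 < x ∧ pvGetB s.1 y (x - 1) = true) ∨ (x + 1 < w ∧ pvGetB s.1 y (x + 1) = true))
  then (pvSet2 s.1 y x true, true) else s

def pvSweep (g : List (List Int)) (land : Int) (h w : Nat)
    (m : List (List Bool)) : List (List Bool) × Bool :=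
  (List.range h).foldl (fun s y =>
    (List.range w).foldl (fun s x => pvSweepCell g land h w s y x) s) (m, false)

-- `while changed:` (fuel only guards totality; a fixpoint is reached within h*w+1 sweeps)
def pvSat (g : List (List Int)) (land : Int) (h w : Nat) :
    Nat → List (List Bool) → List (List Bool)
  | 0, m => m
  | fuel + 1, m =>
      let r := pvSweep g land h w m
      if r.2 then pvSat g land h w fuel r.1 else r.1

def remove_edge_islands_alt (grid : List (List Int)) (land_value : Int) (void_value : Int) : List (List Int) :=
  let h := grid.length
  let w := (grid.getD 0 []).length
  let M := pvSat grid land_value h w (h * w + 1) (pvMarkInit grid land_value h w)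
  (List.range h).foldl (fun g y => (List.range w).foldl (fun g x =>
      if pvGetB M y x = true then pvSet2 g y x void_value else g) g) grid

-- ===== PRECONDITION & SPEC =====
-- Pre_ = exactly the inputs Python A accepts: a nonempty grid, a nonempty first row
-- (w = len(grid[0]) > 0), and every row at least w wide (A indexes grid[y][w-1] for every y,
-- and grid[y][x] for x < w; a shorter row raises IndexError).
def Pre_remove_edge_islands (grid : List (List Int)) (land_value : Int) (void_value : Int) : Prop :=
  0 < grid.length ∧ 0 < (grid.getD 0 []).length ∧
    ∀ r ∈ grid, (grid.getD 0 []).length ≤ r.length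
instance (grid : List (List Int)) (land_value : Int) (void_value : Int) : Decidable (Pre_remove_edge_islands grid land_value void_value) := by unfold Pre_remove_edge_islands; infer_instance

def pvWitness_remove_edge_islands : List (List Int) × Int × Int := ([[1, 0], [0, 1]], 1, 0)

def Spec_remove_edge_islands (grid : List (List Int)) (land_value : Int) (void_value : Int) (out : List (List Int)) : Prop := out = remove_edge_islands_alt grid land_value void_value
instance (grid : List (List Int)) (land_value : Int) (void_value : Int) (out : List (List Int)) : Decidable (Spec_remove_edge_islands grid land_value void_value out) := by unfold Spec_remove_edge_islands; infer_instance

-- ===== CLAIM (what is proved, stated in full; the proofs are below) =====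
def Claim_equal_remove_edge_islands : Prop := ∀ (grid : List (List Int)) (land_value : Int) (void_value : Int), Dom_remove_edge_islands grid land_value void_value → Pre_remove_edge_islands grid land_value void_value → Spec_remove_edge_islands grid land_value void_value (remove_edge_islands grid land_value void_value)

-- ===== LEMMAS AND PROOFS =====
-- ---------- flat-list infrastructure ----------
theorem pv_getD_set {α : Type} (d a : α) (l : List α) (i j : Nat) :
    (l.set i a).getD j d = if i = j ∧ i < l.length then a else l.getD j d := by
  induction l generalizing i j with
  | nil => simp
  | cons b t ih =>
    cases i with
    | zero => cases j <;> simp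
    | succ i =>
      cases j with
      | zero => simp
      | succ j => simpa using ih i j

theorem pv_getD_ext {α : Type} (d : α) : ∀ (a b : List α), a.length = b.length →
    (∀ i, a.getD i d = b.getD i d) → a = b := by
  intro a
  induction a with
  | nil => intro b hl _; cases b <;> simp_all
  | cons x t ih =>
    intro b hl hgd
    cases b with
    | nil => simp at hl
    | cons y u =>
      have h0 := hgd 0
      simp at h0
      have : t = u := ih u (by simpa using hl) (fun i => by simpa using hgd (i + 1))
      simp [h0, this]

theorem pv_count_true_set (l : List Bool) : ∀ (x : Nat), x < l.length → l.getD x false = false →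
    (l.set x true).count true = l.count true + 1 := by
  induction l with
  | nil => simp
  | cons b t ih =>
    intro x hx hf
    cases x with
    | zero => simp_all [List.count_cons]
    | succ x =>
      simp only [List.set_cons_succ, List.count_cons]
      rw [ih x (by simpa using hx) (by simpa using hf)]
      omega

theorem pv_count_false_set (l : List Bool) : ∀ (x : Nat), x < l.length → l.getD x false = false →
    (l.set x true).count false + 1 = l.count false := by
  induction l with
  | nil => simp
  | cons b t ih =>
    intro x hx hf
    cases x with
    | zero => simp_all [List.count_cons]
    | succ x =>
      simp only [List.set_cons_succ, List.count_cons]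
      have := ih x (by simpa using hx) (by simpa using hf)
      omega

-- ---------- matrix infrastructure ----------
theorem pvSet2_length {α : Type} (g : List (List α)) (y x : Nat) (a : α) :
    (pvSet2 g y x a).length = g.length := by simp [pvSet2]

theorem pvSet2_rowlen {α : Type} (g : List (List α)) (y x : Nat) (a : α) (i : Nat) :
    ((pvSet2 g y x a).getD i []).length = (g.getD i []).length := by
  simp only [pvSet2]
  rw [pv_getD_set]
  split
  · rename_i hc
    simp [← hc.1]
  · rfl

theorem pvGetD2_set2 {α : Type} (d a : α) (g : List (List α)) (y x y' x' : Nat) :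
    pvGetD2 d (pvSet2 g y x a) y' x' =
      if y = y' ∧ x = x' ∧ y < g.length ∧ x < (g.getD y []).length then a
      else pvGetD2 d g y' x' := by
  simp only [pvGetD2, pvSet2]
  rw [pv_getD_set]
  by_cases hy1 : y = y'
  · subst hy1
    by_cases hy2 : y < g.length
    · rw [if_pos ⟨rfl, hy2⟩, pv_getD_set]
      by_cases hx : x = x' ∧ x < (g.getD y []).length
      · rw [if_pos hx, if_pos ⟨rfl, hx.1, hy2, hx.2⟩]
      · rw [if_neg hx, if_neg (by tauto)]
    · rw [if_neg (by tauto), if_neg (by tauto)]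
  · rw [if_neg (by tauto), if_neg (by tauto)]

theorem pv_getD_replicate {α : Type} (d a : α) (n i : Nat) :
    (List.replicate n a).getD i d = if i < n then a else d := by
  induction n generalizing i with
  | zero => simp
  | succ n ih =>
    cases i with
    | zero => simp [List.replicate_succ]
    | succ i =>
      simp only [List.replicate_succ, List.getD_cons_succ, ih]
      by_cases h : i < n
      · rw [if_pos h, if_pos (by omega)]
      · rw [if_neg h, if_neg (by omega)]

theorem pv_getD_range_map {α : Type} (f : Nat → α) (d : α) (n i : Nat) :
    ((List.range n).map f).getD i d = if i < n then f i else d := by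
  induction n generalizing i with
  | zero => simp
  | succ n ih =>
    rw [List.range_succ, List.map_append]
    by_cases hi : i < n
    · rw [List.getD_append _ _ _ _ (by simpa using hi), ih, if_pos hi, if_pos (by omega)]
    · rw [List.getD_append_right _ _ _ _ (by simpa using hi)]
      simp only [List.length_map, List.length_range]
      by_cases he : i = n
      · subst he; simp
      · rw [if_neg (by omega)]
        cases hk : i - n with
        | zero => omega
        | succ k => simp

-- matrix equality from shapes + pointwise getD
theorem pvGrid_ext (a b : List (List Int)) (hl : a.length = b.length)
    (hr : ∀ i, (a.getD i []).length = (b.getD i []).length)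
    (hg : ∀ y x, pvGet2 a y x = pvGet2 b y x) : a = b := by
  refine pv_getD_ext [] a b hl (fun i => ?_)
  refine pv_getD_ext 0 _ _ (hr i) (fun j => ?_)
  exact hg i j

-- ---------- the reachability predicate both algorithms compute ----------
def pvAdj (y x y' x' : Nat) : Prop :=
  (y' = y ∧ (x' = x + 1 ∨ x' + 1 = x)) ∨ (x' = x ∧ (y' = y + 1 ∨ y' + 1 = y))

inductive pvReach (O : List (List Int)) (L : Int) (h w : Nat) : Nat → Nat → Prop
  | base {y x : Nat} : y < h → x < w → (y = 0 ∨ y = h - 1 ∨ x = 0 ∨ x = w - 1) →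
      pvGet2 O y x = L → pvReach O L h w y x
  | step {y x y' x' : Nat} : pvReach O L h w y x → y' < h → x' < w →
      pvGet2 O y' x' = L → pvAdj y x y' x' → pvReach O L h w y' x'

def pvShapeB (h w : Nat) (v : List (List Bool)) : Prop :=
  v.length = h ∧ ∀ r ∈ v, r.length = w

theorem pvShapeB_rowlen (h w : Nat) (v : List (List Bool)) (sh : pvShapeB h w v)
    (i : Nat) (hi : i < h) : (v.getD i []).length = w := by
  have hlen : i < v.length := by rw [sh.1]; exact hi
  rw [List.getD_eq_getElem _ _ hlen]
  exact sh.2 _ (List.getElem_mem hlen)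

theorem pvShapeB_set2 (h w : Nat) (v : List (List Bool)) (y x : Nat) (a : Bool)
    (sh : pvShapeB h w v) : pvShapeB h w (pvSet2 v y x a) := by
  by_cases hy : y < v.length
  · constructor
    · rw [pvSet2_length, sh.1]
    · intro r hr
      simp only [pvSet2] at hr
      rcases List.mem_or_eq_of_mem_set hr with hmem | heq
      · exact sh.2 _ hmem
      · subst heq
        rw [List.length_set, List.getD_eq_getElem _ _ hy]
        exact sh.2 _ (List.getElem_mem hy)
  · simp only [pvSet2]
    rw [List.set_eq_of_length_le (by omega)]
    exact sh

theorem pvGetB_inb (h w : Nat) (v : List (List Bool)) (sh : pvShapeB h w v)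
    (y x : Nat) (hv : pvGetB v y x = true) : y < h ∧ x < w := by
  by_cases hy : y < h
  · refine ⟨hy, ?_⟩
    by_cases hx : x < w
    · exact hx
    · exfalso
      have hrl := pvShapeB_rowlen h w v sh y hy
      simp only [pvGetB, pvGetD2] at hv
      rw [List.getD_eq_getElem?_getD, List.getElem?_eq_none (by omega : (v.getD y []).length ≤ x)] at hv
      simp at hv
  · exfalso
    simp only [pvGetB, pvGetD2] at hv
    have hrow : v.getD y [] = [] := by
      rw [List.getD_eq_getElem?_getD, List.getElem?_eq_none (by rw [sh.1]; omega : v.length ≤ y)]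
      rfl
    rw [hrow] at hv
    simp at hv

theorem pvGetB_set2 (v : List (List Bool)) (y x y' x' : Nat) (a : Bool) :
    pvGetB (pvSet2 v y x a) y' x' =
      if y = y' ∧ x = x' ∧ y < v.length ∧ x < (v.getD y []).length then a
      else pvGetB v y' x' := pvGetD2_set2 false a v y x y' x'

theorem pvGetB_set2_self (h w : Nat) (v : List (List Bool)) (sh : pvShapeB h w v)
    (y x : Nat) (hy : y < h) (hx : x < w) : pvGetB (pvSet2 v y x true) y x = true := by
  rw [pvGetB_set2]
  rw [if_pos ⟨rfl, rfl, by rw [sh.1]; exact hy, by rw [pvShapeB_rowlen h w v sh y hy]; exact hx⟩]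

theorem pvGetB_set2_mono (v : List (List Bool)) (y x y' x' : Nat)
    (hv : pvGetB v y' x' = true) : pvGetB (pvSet2 v y x true) y' x' = true := by
  rw [pvGetB_set2]; split <;> [rfl; exact hv]

-- counting marks
def pvCountT (v : List (List Bool)) : Nat := (v.map (fun r => r.count true)).sum

theorem pvCountT_le (h w : Nat) (v : List (List Bool)) (sh : pvShapeB h w v) :
    pvCountT v ≤ h * w := by
  rcases sh with ⟨hl, hr⟩
  subst hl
  induction v with
  | nil => simp [pvCountT]
  | cons r t ih =>
    simp only [pvCountT, List.map_cons, List.sum_cons, List.length_cons]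
    have h1 : r.count true ≤ w := by
      rw [← hr r (by simp)]; exact List.count_le_length
    have h2 : pvCountT t ≤ t.length * w := ih (fun r hrr => hr r (by simp [hrr]))
    calc r.count true + pvCountT t ≤ w + t.length * w := by omega
    _ = (t.length + 1) * w := by ring

theorem pvCountT_set2 (v : List (List Bool)) : ∀ (y : Nat), ∀ (x : Nat),
    y < v.length → x < (v.getD y []).length → pvGetB v y x = false →
    pvCountT (pvSet2 v y x true) = pvCountT v + 1 := by
  induction v with
  | nil => simp
  | cons r t ih =>
    intro y x hy hx hf
    cases y with
    | zero =>
      simp only [pvSet2, List.getD_cons_zero, List.set_cons_zero, pvCountT, List.map_cons,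
        List.sum_cons]
      simp only [List.getD_cons_zero] at hx
      simp only [pvGetB, pvGetD2, List.getD_cons_zero] at hf
      rw [pv_count_true_set r x hx hf]
      omega
    | succ y =>
      have hstep : pvSet2 (r :: t) (y + 1) x true = r :: pvSet2 t y x true := by
        simp [pvSet2, List.set_cons_succ]
      rw [hstep]
      simp only [pvCountT, List.map_cons, List.sum_cons]
      have := ih y x (by simpa using hy) (by simpa using hx)
        (by simpa [pvGetB, pvGetD2] using hf)
      simp only [pvCountT] at this
      omega

-- ---------- B-side: sweep / saturation ----------
def pvSound (O : List (List Int)) (L : Int) (h w : Nat) (m : List (List Bool)) : Prop :=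
  ∀ y x, pvGetB m y x = true → pvReach O L h w y x

def pvNbr (m : List (List Bool)) (h w y x : Nat) : Prop :=
  (0 < y ∧ pvGetB m (y - 1) x = true) ∨ (y + 1 < h ∧ pvGetB m (y + 1) x = true) ∨
  (0 < x ∧ pvGetB m y (x - 1) = true) ∨ (x + 1 < w ∧ pvGetB m y (x + 1) = true)

theorem pvNbr_mono (m m' : List (List Bool)) (h w y x : Nat)
    (hmm : ∀ y' x', pvGetB m y' x' = true → pvGetB m' y' x' = true)
    (hn : pvNbr m h w y x) : pvNbr m' h w y x := by
  rcases hn with ⟨h1, h2⟩ | ⟨h1, h2⟩ | ⟨h1, h2⟩ | ⟨h1, h2⟩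
  · exact Or.inl ⟨h1, hmm _ _ h2⟩
  · exact Or.inr (Or.inl ⟨h1, hmm _ _ h2⟩)
  · exact Or.inr (Or.inr (Or.inl ⟨h1, hmm _ _ h2⟩))
  · exact Or.inr (Or.inr (Or.inr ⟨h1, hmm _ _ h2⟩))

-- one pvSweepCell: all facts needed about it
theorem pvSweepCell_facts (O : List (List Int)) (L : Int) (h w : Nat)
    (s : List (List Bool) × Bool) (y x : Nat) (hy : y < h) (hx : x < w)
    (sh : pvShapeB h w s.1) (snd : pvSound O L h w s.1) :
    let r := pvSweepCell O L h w s y x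
    pvShapeB h w r.1 ∧ pvSound O L h w r.1 ∧
    (∀ y' x', pvGetB s.1 y' x' = true → pvGetB r.1 y' x' = true) ∧
    (r.2 = false → r = s) ∧
    (r.2 = true → s.2 = true ∨ pvCountT r.1 = pvCountT s.1 + 1) ∧
    (pvCountT s.1 ≤ pvCountT r.1) ∧
    (s.2 = true → r.2 = true) ∧
    (pvGet2 O y x = L → pvNbr s.1 h w y x → pvGetB r.1 y x = true) := by
  intro r
  show pvShapeB h w r.1 ∧ _
  by_cases hc : ¬ (pvGetB s.1 y x = true) ∧ pvGet2 O y x = L ∧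
      ((0 < y ∧ pvGetB s.1 (y - 1) x = true) ∨ (y + 1 < h ∧ pvGetB s.1 (y + 1) x = true) ∨
       (0 < x ∧ pvGetB s.1 y (x - 1) = true) ∨ (x + 1 < w ∧ pvGetB s.1 y (x + 1) = true))
  · have hr : r = (pvSet2 s.1 y x true, true) := by
      simp only [r, pvSweepCell, if_pos hc]
    rw [hr]
    have hinb : y < s.1.length ∧ x < (s.1.getD y []).length := by
      constructor
      · rw [sh.1]; exact hy
      · rw [pvShapeB_rowlen h w s.1 sh y hy]; exact hx
    refine ⟨pvShapeB_set2 h w s.1 y x true sh, ?_, ?_, ?_, ?_, ?_, ?_, ?_⟩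
    · -- soundness
      intro y' x' hv
      rw [pvGetB_set2] at hv
      by_cases he : y = y' ∧ x = x' ∧ y < s.1.length ∧ x < (s.1.getD y []).length
      · rcases he with ⟨e1, e2, -⟩
        subst e1; subst e2
        -- the newly marked cell: justified by a marked neighbour
        rcases hc.2.2 with ⟨hb, hm⟩ | ⟨hb, hm⟩ | ⟨hb, hm⟩ | ⟨hb, hm⟩
        · exact pvReach.step (snd _ _ hm) hy hx hc.2.1 (Or.inr ⟨rfl, Or.inl (by omega)⟩)
        · exact pvReach.step (snd _ _ hm) hy hx hc.2.1 (Or.inr ⟨rfl, Or.inr (by omega)⟩)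
        · exact pvReach.step (snd _ _ hm) hy hx hc.2.1 (Or.inl ⟨rfl, Or.inl (by omega)⟩)
        · exact pvReach.step (snd _ _ hm) hy hx hc.2.1 (Or.inl ⟨rfl, Or.inr (by omega)⟩)
      · rw [if_neg he] at hv
        exact snd _ _ hv
    · intro y' x' hv; exact pvGetB_set2_mono _ _ _ _ _ hv
    · intro hfalse; simp at hfalse
    · intro _
      right
      have hf : pvGetB s.1 y x = false := by
        rcases Bool.eq_false_or_eq_true (pvGetB s.1 y x) with hg | hg
        · exact absurd hg hc.1
        · exact hg
      exact pvCountT_set2 s.1 y x hinb.1 hinb.2 hf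
    · have hf : pvGetB s.1 y x = false := by
        rcases Bool.eq_false_or_eq_true (pvGetB s.1 y x) with hg | hg
        · exact absurd hg hc.1
        · exact hg
      rw [pvCountT_set2 s.1 y x hinb.1 hinb.2 hf]
      omega
    · intro _; rfl
    · intro _ _
      exact pvGetB_set2_self h w s.1 sh y x hy hx
  · have hr : r = s := by
      simp only [r, pvSweepCell, if_neg hc]
    rw [hr]
    refine ⟨sh, snd, fun _ _ hv => hv, fun _ => rfl, fun ht => Or.inl ht, le_refl _,
      fun ht => ht, ?_⟩
    intro hl hn
    -- the cell was not fired: either already marked, or the guard analysis contradicts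
    by_cases hm : pvGetB s.1 y x = true
    · exact hm
    · exfalso
      exact hc ⟨hm, hl, hn⟩

-- inner fold of one sweep row (over an arbitrary column list)
theorem pvRowFold_facts (O : List (List Int)) (L : Int) (h w : Nat) (y : Nat) (hy : y < h) :
    ∀ (xs : List Nat), (∀ x ∈ xs, x < w) → ∀ (s : List (List Bool) × Bool),
    pvShapeB h w s.1 → pvSound O L h w s.1 →
    pvShapeB h w (xs.foldl (fun s x => pvSweepCell O L h w s y x) s).1 ∧
    pvSound O L h w (xs.foldl (fun s x => pvSweepCell O L h w s y x) s).1 ∧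
    (∀ y' x', pvGetB s.1 y' x' = true →
      pvGetB (xs.foldl (fun s x => pvSweepCell O L h w s y x) s).1 y' x' = true) ∧
    ((xs.foldl (fun s x => pvSweepCell O L h w s y x) s).2 = false →
      (xs.foldl (fun s x => pvSweepCell O L h w s y x) s) = s) ∧
    ((xs.foldl (fun s x => pvSweepCell O L h w s y x) s).2 = true →
      s.2 = true ∨ pvCountT s.1 < pvCountT (xs.foldl (fun s x => pvSweepCell O L h w s y x) s).1) ∧
    (pvCountT s.1 ≤ pvCountT (xs.foldl (fun s x => pvSweepCell O L h w s y x) s).1) ∧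
    (s.2 = true → (xs.foldl (fun s x => pvSweepCell O L h w s y x) s).2 = true) ∧
    (∀ m0, (∀ y' x', pvGetB m0 y' x' = true → pvGetB s.1 y' x' = true) →
      ∀ x ∈ xs, pvGet2 O y x = L → pvNbr m0 h w y x →
        pvGetB (xs.foldl (fun s x => pvSweepCell O L h w s y x) s).1 y x = true) := by
  intro xs
  induction xs with
  | nil =>
    intro _ s sh snd
    refine ⟨sh, snd, fun _ _ hv => hv, fun _ => rfl, fun ht => Or.inl ht, le_refl _,
      fun ht => ht, ?_⟩
    intro _ _ x hx
    simp at hx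
  | cons x xs ih =>
    intro hxs s sh snd
    have hx : x < w := hxs x (by simp)
    obtain ⟨c1, c2, c3, c4, c5, c6, c7, c8⟩ :=
      pvSweepCell_facts O L h w s y x hy hx sh snd
    simp only [List.foldl_cons]
    obtain ⟨f1, f2, f3, f4, f5, f6, f7, f8⟩ :=
      ih (fun x hxm => hxs x (by simp [hxm])) (pvSweepCell O L h w s y x) c1 c2
    refine ⟨f1, f2, ?_, ?_, ?_, ?_, ?_, ?_⟩
    · intro y' x' hv; exact f3 y' x' (c3 y' x' hv)
    · intro hff
      have h1 := f4 hff
      rw [h1] at hff ⊢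
      exact c4 hff
    · intro hft
      rcases f5 hft with h1 | h1
      · rcases c5 h1 with h2 | h2
        · exact Or.inl h2
        · exact Or.inr (by omega)
      · exact Or.inr (by omega)
    · exact le_trans c6 f6
    · intro hst; exact f7 (c7 hst)
    · intro m0 hsub x' hx' hl hn
      rcases List.mem_cons.mp hx' with rfl | hmem
      · -- head column: the cell itself fires (or is already marked) and the mark persists
        exact f3 y x' (c8 hl (pvNbr_mono m0 s.1 h w y x' hsub hn))
      · exact f8 m0 (fun y' x' hv => c3 y' x' (hsub y' x' hv)) x' hmem hl hn

-- outer fold of one sweep (over an arbitrary row list)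
theorem pvColFold_facts (O : List (List Int)) (L : Int) (h w : Nat) :
    ∀ (ys : List Nat), (∀ y ∈ ys, y < h) → ∀ (s : List (List Bool) × Bool),
    pvShapeB h w s.1 → pvSound O L h w s.1 →
    pvShapeB h w (ys.foldl (fun s y => (List.range w).foldl (fun s x => pvSweepCell O L h w s y x) s) s).1 ∧
    pvSound O L h w (ys.foldl (fun s y => (List.range w).foldl (fun s x => pvSweepCell O L h w s y x) s) s).1 ∧
    (∀ y' x', pvGetB s.1 y' x' = true →
      pvGetB (ys.foldl (fun s y => (List.range w).foldl (fun s x => pvSweepCell O L h w s y x) s) s).1 y' x' = true) ∧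
    ((ys.foldl (fun s y => (List.range w).foldl (fun s x => pvSweepCell O L h w s y x) s) s).2 = false →
      (ys.foldl (fun s y => (List.range w).foldl (fun s x => pvSweepCell O L h w s y x) s) s) = s) ∧
    ((ys.foldl (fun s y => (List.range w).foldl (fun s x => pvSweepCell O L h w s y x) s) s).2 = true →
      s.2 = true ∨ pvCountT s.1 < pvCountT (ys.foldl (fun s y => (List.range w).foldl (fun s x => pvSweepCell O L h w s y x) s) s).1) ∧
    (pvCountT s.1 ≤ pvCountT (ys.foldl (fun s y => (List.range w).foldl (fun s x => pvSweepCell O L h w s y x) s) s).1) ∧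
    (s.2 = true → (ys.foldl (fun s y => (List.range w).foldl (fun s x => pvSweepCell O L h w s y x) s) s).2 = true) ∧
    (∀ m0, (∀ y' x', pvGetB m0 y' x' = true → pvGetB s.1 y' x' = true) →
      ∀ y ∈ ys, ∀ x, x < w → pvGet2 O y x = L → pvNbr m0 h w y x →
        pvGetB (ys.foldl (fun s y => (List.range w).foldl (fun s x => pvSweepCell O L h w s y x) s) s).1 y x = true) := by
  intro ys
  induction ys with
  | nil =>
    intro _ s sh snd
    refine ⟨sh, snd, fun _ _ hv => hv, fun _ => rfl, fun ht => Or.inl ht, le_refl _, fun ht => ht, ?_⟩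
    intro _ _ y hymem
    simp at hymem
  | cons y ys ih =>
    intro hys s sh snd
    have hy : y < h := hys y (by simp)
    obtain ⟨r1, r2, r3, r4, r5, r6, r7, r8⟩ :=
      pvRowFold_facts O L h w y hy (List.range w) (fun x hxm => List.mem_range.mp hxm) s sh snd
    simp only [List.foldl_cons]
    obtain ⟨f1, f2, f3, f4, f5, f6, f7, f8⟩ :=
      ih (fun y' hym => hys y' (by simp [hym]))
        ((List.range w).foldl (fun s x => pvSweepCell O L h w s y x) s) r1 r2
    refine ⟨f1, f2, ?_, ?_, ?_, ?_, ?_, ?_⟩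
    · intro y' x' hv; exact f3 y' x' (r3 y' x' hv)
    · intro hff
      have h1 := f4 hff
      rw [h1] at hff ⊢
      exact r4 hff
    · intro hft
      rcases f5 hft with h1 | h1
      · rcases r5 h1 with h2 | h2
        · exact Or.inl h2
        · exact Or.inr (by omega)
      · have := r6
        exact Or.inr (by omega)
    · exact le_trans r6 f6
    · intro hst; exact f7 (r7 hst)
    · intro m0 hsub y' hy' x hxw hl hn
      rcases List.mem_cons.mp hy' with rfl | hmem
      · exact f3 y' x (r8 m0 hsub x (List.mem_range.mpr hxw) hl hn)
      · exact f8 m0 (fun y'' x'' hv => r3 y'' x'' (hsub y'' x'' hv)) y' hmem x hxw hl hn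

theorem pvSweep_facts (O : List (List Int)) (L : Int) (h w : Nat) (m : List (List Bool))
    (sh : pvShapeB h w m) (snd : pvSound O L h w m) :
    pvShapeB h w (pvSweep O L h w m).1 ∧ pvSound O L h w (pvSweep O L h w m).1 ∧
    (∀ y x, pvGetB m y x = true → pvGetB (pvSweep O L h w m).1 y x = true) ∧
    ((pvSweep O L h w m).2 = false → (pvSweep O L h w m).1 = m) ∧
    ((pvSweep O L h w m).2 = true → pvCountT m < pvCountT (pvSweep O L h w m).1) ∧
    (∀ y x, y < h → x < w → pvGet2 O y x = L → pvNbr m h w y x →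
      pvGetB (pvSweep O L h w m).1 y x = true) := by
  obtain ⟨f1, f2, f3, f4, f5, f6, f7, f8⟩ :=
    pvColFold_facts O L h w (List.range h) (fun y hym => List.mem_range.mp hym) (m, false) sh snd
  refine ⟨f1, f2, f3, ?_, ?_, ?_⟩
  · intro hff
    have := f4 hff
    simp only [pvSweep]
    rw [show ((List.range h).foldl (fun s y => (List.range w).foldl (fun s x => pvSweepCell O L h w s y x) s) (m, false)) = (m, false) from this]
  · intro hft
    rcases f5 hft with h1 | h1
    · simp at h1
    · exact h1
  · intro y x hyy hxx hl hn
    exact f8 m (fun _ _ hv => hv) y (List.mem_range.mpr hyy) x hxx hl hn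

theorem pvSat_facts (O : List (List Int)) (L : Int) (h w : Nat) :
    ∀ (fuel : Nat) (m : List (List Bool)), pvShapeB h w m → pvSound O L h w m →
    h * w < pvCountT m + fuel →
    pvShapeB h w (pvSat O L h w fuel m) ∧ pvSound O L h w (pvSat O L h w fuel m) ∧
    (∀ y x, pvGetB m y x = true → pvGetB (pvSat O L h w fuel m) y x = true) ∧
    (∀ y x, y < h → x < w → pvGet2 O y x = L → pvNbr (pvSat O L h w fuel m) h w y x →
      pvGetB (pvSat O L h w fuel m) y x = true) := by
  intro fuel
  induction fuel with
  | zero =>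
    intro m sh _ hcnt
    have := pvCountT_le h w m sh
    omega
  | succ fuel ih =>
    intro m sh snd hcnt
    obtain ⟨s1, s2, s3, s4, s5, s6⟩ := pvSweep_facts O L h w m sh snd
    show pvShapeB h w (pvSat O L h w (fuel + 1) m) ∧ _
    rcases Bool.eq_false_or_eq_true (pvSweep O L h w m).2 with hch | hch
    · -- another sweep
      have heq : pvSat O L h w (fuel + 1) m = pvSat O L h w fuel (pvSweep O L h w m).1 := by
        simp only [pvSat, hch, if_pos]
      rw [heq]
      have hlt : h * w < pvCountT (pvSweep O L h w m).1 + fuel := by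
        have := s5 hch; omega
      obtain ⟨g1, g2, g3, g4⟩ := ih (pvSweep O L h w m).1 s1 s2 hlt
      exact ⟨g1, g2, fun y x hv => g3 y x (s3 y x hv), g4⟩
    · -- fixpoint reached
      have heq : pvSat O L h w (fuel + 1) m = m := by
        simp only [pvSat, hch]
        simp [s4 hch]
      rw [heq]
      refine ⟨sh, snd, fun _ _ hv => hv, ?_⟩
      intro y x hyy hxx hl hn
      have := s6 y x hyy hxx hl hn
      rwa [s4 hch] at this

theorem pvMarkInit_shape (O : List (List Int)) (L : Int) (h w : Nat) :
    pvShapeB h w (pvMarkInit O L h w) := by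
  constructor
  · simp [pvMarkInit]
  · intro r hr
    simp only [pvMarkInit, List.mem_map] at hr
    obtain ⟨y, -, hy⟩ := hr
    rw [← hy]
    simp

theorem pvMarkInit_getB (O : List (List Int)) (L : Int) (h w : Nat) (y x : Nat) :
    pvGetB (pvMarkInit O L h w) y x = true ↔
      (y < h ∧ x < w ∧ pvGet2 O y x = L ∧ (y = 0 ∨ y = h - 1 ∨ x = 0 ∨ x = w - 1)) := by
  simp only [pvGetB, pvGetD2, pvMarkInit]
  rw [pv_getD_range_map]
  by_cases hy : y < h
  · rw [if_pos hy, pv_getD_range_map]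
    by_cases hx : x < w
    · rw [if_pos hx]
      simp only [decide_eq_true_eq]
      constructor
      · intro hc; exact ⟨hy, hx, hc⟩
      · intro hc; exact hc.2.2
    · rw [if_neg hx]
      simp only [Bool.false_eq_true, false_iff]
      intro hc
      exact hx hc.2.1
  · rw [if_neg hy]
    simp only [List.getD_nil]
    simp only [Bool.false_eq_true, false_iff]
    intro hc
    exact hy hc.1

theorem pvAdj_nbr (M : List (List Bool)) (h w : Nat) (yc xc yd xd : Nat)
    (hyc : yc < h) (hxc : xc < w) (hAdj : pvAdj yc xc yd xd)
    (hv : pvGetB M yc xc = true) : pvNbr M h w yd xd := by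
  rcases hAdj with ⟨e1, e2 | e2⟩ | ⟨e1, e2 | e2⟩
  · -- xd = xc + 1 : left neighbour of (yd, xd) is (yc, xc)
    refine Or.inr (Or.inr (Or.inl ⟨by omega, ?_⟩))
    rw [e1, show xd - 1 = xc by omega]
    exact hv
  · -- xd + 1 = xc : right neighbour
    refine Or.inr (Or.inr (Or.inr ⟨by omega, ?_⟩))
    rw [e1, show xd + 1 = xc by omega]
    exact hv
  · -- yd = yc + 1 : up neighbour
    refine Or.inl ⟨by omega, ?_⟩
    rw [e1, show yd - 1 = yc by omega]
    exact hv
  · -- yd + 1 = yc : down neighbour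
    refine Or.inr (Or.inl ⟨by omega, ?_⟩)
    rw [e1, show yd + 1 = yc by omega]
    exact hv

-- final B mark matrix = reachability
theorem pvMB_iff (O : List (List Int)) (L : Int) (h w : Nat) (y x : Nat) :
    pvGetB (pvSat O L h w (h * w + 1) (pvMarkInit O L h w)) y x = true ↔
      pvReach O L h w y x := by
  have hsh := pvMarkInit_shape O L h w
  have hsnd : pvSound O L h w (pvMarkInit O L h w) := by
    intro y x hv
    rw [pvMarkInit_getB] at hv
    exact pvReach.base hv.1 hv.2.1 hv.2.2.2 hv.2.2.1
  obtain ⟨g1, g2, g3, g4⟩ := pvSat_facts O L h w (h * w + 1) (pvMarkInit O L h w) hsh hsnd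
    (by omega)
  constructor
  · exact g2 y x
  · intro hr
    induction hr with
    | base hy hx hb hl =>
      exact g3 _ _ ((pvMarkInit_getB O L h w _ _).mpr ⟨hy, hx, hl, hb⟩)
    | step hr hy' hx' hl hAdj ihr =>
      rename_i yc xc yd xd
      obtain ⟨hyc, hxc⟩ := pvGetB_inb h w _ g1 yc xc ihr
      exact g4 yd xd hy' hx' hl (pvAdj_nbr _ h w yc xc yd xd hyc hxc hAdj ihr)

-- ---------- the write-back pass of B ----------
def pvShapeEq (a b : List (List Int)) : Prop :=
  a.length = b.length ∧ ∀ i, (a.getD i []).length = (b.getD i []).length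

theorem pvShapeEq_refl (a : List (List Int)) : pvShapeEq a a := ⟨rfl, fun _ => rfl⟩

theorem pvShapeEq_set2 (O g : List (List Int)) (y x : Nat) (a : Int)
    (hs : pvShapeEq O g) : pvShapeEq O (pvSet2 g y x a) :=
  ⟨by rw [pvSet2_length, hs.1], fun i => by rw [pvSet2_rowlen]; exact hs.2 i⟩

theorem pvWriteInner (O : List (List Int)) (M : List (List Bool)) (V : Int) (y : Nat)
    (hy : y < O.length) :
    ∀ (xs : List Nat), (∀ x ∈ xs, x < (O.getD y []).length) →
    ∀ (g : List (List Int)), pvShapeEq O g →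
    pvShapeEq O (xs.foldl (fun g x => if pvGetB M y x = true then pvSet2 g y x V else g) g) ∧
    (∀ y' x', pvGet2 (xs.foldl (fun g x => if pvGetB M y x = true then pvSet2 g y x V else g) g) y' x' =
      if y' = y ∧ x' ∈ xs ∧ pvGetB M y x' = true then V else pvGet2 g y' x') := by
  intro xs
  induction xs with
  | nil =>
    intro _ g hg
    refine ⟨hg, fun y' x' => ?_⟩
    rw [if_neg (by simp)]
    rfl
  | cons x xs ih =>
    intro hxs g hg
    simp only [List.foldl_cons]
    by_cases hM : pvGetB M y x = true
    · rw [if_pos hM]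
      have hg1 : pvShapeEq O (pvSet2 g y x V) := pvShapeEq_set2 O g y x V hg
      obtain ⟨f1, f2⟩ := ih (fun x' hx' => hxs x' (by simp [hx'])) (pvSet2 g y x V) hg1
      refine ⟨f1, fun y' x' => ?_⟩
      rw [f2 y' x']
      have hb : y < g.length ∧ x < (g.getD y []).length := by
        refine ⟨by rw [← hg.1]; exact hy, ?_⟩
        rw [← hg.2 y]
        exact hxs x (by simp)
      by_cases c1 : y' = y ∧ x' ∈ xs ∧ pvGetB M y x' = true
      · rw [if_pos c1, if_pos ⟨c1.1, by simp [c1.2.1], c1.2.2⟩]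
      · rw [if_neg c1]
        rw [show pvGet2 (pvSet2 g y x V) y' x' =
            if y = y' ∧ x = x' ∧ y < g.length ∧ x < (g.getD y []).length then V
            else pvGet2 g y' x' from pvGetD2_set2 0 V g y x y' x']
        by_cases c2 : y' = y ∧ x' = x
        · rw [if_pos ⟨c2.1.symm, c2.2.symm, hb.1, hb.2⟩,
            if_pos ⟨c2.1, by simp [c2.2], by rw [c2.2]; exact hM⟩]
        · rw [if_neg (by tauto), if_neg ?_]
          intro hc
          rcases List.mem_cons.mp hc.2.1 with he | hm
          · exact c2 ⟨hc.1, he⟩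
          · exact c1 ⟨hc.1, hm, hc.2.2⟩
    · rw [if_neg hM]
      obtain ⟨f1, f2⟩ := ih (fun x' hx' => hxs x' (by simp [hx'])) g hg
      refine ⟨f1, fun y' x' => ?_⟩
      rw [f2 y' x']
      by_cases c1 : y' = y ∧ x' ∈ xs ∧ pvGetB M y x' = true
      · rw [if_pos c1, if_pos ⟨c1.1, by simp [c1.2.1], c1.2.2⟩]
      · rw [if_neg c1, if_neg ?_]
        intro hc
        rcases List.mem_cons.mp hc.2.1 with he | hm
        · rw [hc.1, he] at hc
          exact hM hc.2.2
        · exact c1 ⟨hc.1, hm, hc.2.2⟩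

theorem pvWriteOuter (O : List (List Int)) (M : List (List Bool)) (V : Int) (w : Nat)
    (hrow : ∀ i, i < O.length → w ≤ (O.getD i []).length) :
    ∀ (ys : List Nat), (∀ y ∈ ys, y < O.length) →
    ∀ (g : List (List Int)), pvShapeEq O g →
    pvShapeEq O (ys.foldl (fun g y => (List.range w).foldl
      (fun g x => if pvGetB M y x = true then pvSet2 g y x V else g) g) g) ∧
    (∀ y' x', pvGet2 (ys.foldl (fun g y => (List.range w).foldl
      (fun g x => if pvGetB M y x = true then pvSet2 g y x V else g) g) g) y' x' =
      if y' ∈ ys ∧ x' < w ∧ pvGetB M y' x' = true then V else pvGet2 g y' x') := by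
  intro ys
  induction ys with
  | nil =>
    intro _ g hg
    refine ⟨hg, fun y' x' => ?_⟩
    rw [if_neg (by simp)]
    rfl
  | cons y ys ih =>
    intro hys g hg
    have hy : y < O.length := hys y (by simp)
    simp only [List.foldl_cons]
    obtain ⟨r1, r2⟩ := pvWriteInner O M V y hy (List.range w)
      (fun x hx => lt_of_lt_of_le (List.mem_range.mp hx) (hrow y hy)) g hg
    obtain ⟨f1, f2⟩ := ih (fun y' hy' => hys y' (by simp [hy'])) _ r1
    refine ⟨f1, fun y' x' => ?_⟩
    rw [f2 y' x', r2 y' x']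
    by_cases c1 : y' ∈ ys ∧ x' < w ∧ pvGetB M y' x' = true
    · rw [if_pos c1, if_pos ⟨by simp [c1.1], c1.2.1, c1.2.2⟩]
    · rw [if_neg c1]
      by_cases c2 : y' = y ∧ x' ∈ List.range w ∧ pvGetB M y x' = true
      · rw [if_pos c2, if_pos ?_]
        exact ⟨by simp [c2.1], List.mem_range.mp c2.2.1, by rw [c2.1]; exact c2.2.2⟩
      · rw [if_neg c2, if_neg ?_]
        intro hc
        rcases List.mem_cons.mp hc.1 with he | hm
        · exact c2 ⟨he, List.mem_range.mpr hc.2.1, by rw [← he]; exact hc.2.2⟩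
        · exact c1 ⟨hm, hc.2⟩

-- characterization of B's result
theorem pvB_char (grid : List (List Int)) (L V : Int)
    (pre : Pre_remove_edge_islands grid L V) :
    pvShapeEq grid (remove_edge_islands_alt grid L V) ∧
    (∀ y x, pvReach grid L grid.length (grid.getD 0 []).length y x →
      pvGet2 (remove_edge_islands_alt grid L V) y x = V) ∧
    (∀ y x, ¬ pvReach grid L grid.length (grid.getD 0 []).length y x →
      pvGet2 (remove_edge_islands_alt grid L V) y x = pvGet2 grid y x) := by
  obtain ⟨hpos, hwpos, hrows⟩ := pre
  have hrow : ∀ i, i < grid.length → (grid.getD 0 []).length ≤ (grid.getD i []).length := by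
    intro i hi
    refine hrows _ ?_
    rw [List.getD_eq_getElem _ _ hi]
    exact List.getElem_mem hi
  obtain ⟨w1, w2⟩ := pvWriteOuter grid
    (pvSat grid L grid.length (grid.getD 0 []).length ((grid.length) * ((grid.getD 0 []).length) + 1)
      (pvMarkInit grid L grid.length (grid.getD 0 []).length))
    V (grid.getD 0 []).length hrow (List.range grid.length)
    (fun y hy => List.mem_range.mp hy) grid (pvShapeEq_refl grid)
  have hsh : pvShapeB grid.length (grid.getD 0 []).length
      (pvSat grid L grid.length (grid.getD 0 []).length ((grid.length) * ((grid.getD 0 []).length) + 1)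
        (pvMarkInit grid L grid.length (grid.getD 0 []).length)) := by
    have hsnd : pvSound grid L grid.length (grid.getD 0 []).length
        (pvMarkInit grid L grid.length (grid.getD 0 []).length) := by
      intro y x hv
      rw [pvMarkInit_getB] at hv
      exact pvReach.base hv.1 hv.2.1 hv.2.2.2 hv.2.2.1
    exact (pvSat_facts grid L grid.length (grid.getD 0 []).length _ _
      (pvMarkInit_shape grid L grid.length (grid.getD 0 []).length) hsnd (by omega)).1
  have halt : remove_edge_islands_alt grid L V =
      (List.range grid.length).foldl (fun g y => (List.range (grid.getD 0 []).length).foldl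
        (fun g x => if pvGetB (pvSat grid L grid.length (grid.getD 0 []).length
          ((grid.length) * ((grid.getD 0 []).length) + 1)
          (pvMarkInit grid L grid.length (grid.getD 0 []).length)) y x = true
          then pvSet2 g y x V else g) g) grid := rfl
  refine ⟨by rw [halt]; exact w1, ?_, ?_⟩
  · intro y x hr
    rw [halt, w2 y x]
    have hv := (pvMB_iff grid L grid.length (grid.getD 0 []).length y x).mpr hr
    obtain ⟨hyy, hxx⟩ := pvGetB_inb _ _ _ hsh y x hv
    rw [if_pos ⟨List.mem_range.mpr hyy, hxx, hv⟩]
  · intro y x hr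
    rw [halt, w2 y x]
    rw [if_neg ?_]
    intro hc
    exact hr ((pvMB_iff grid L grid.length (grid.getD 0 []).length y x).mp hc.2.2)

-- ---------- A-side: BFS invariants ----------
def pvCountF (v : List (List Bool)) : Nat := (v.map (fun r => r.count false)).sum

theorem pvCountF_le (h w : Nat) (v : List (List Bool)) (sh : pvShapeB h w v) :
    pvCountF v ≤ h * w := by
  rcases sh with ⟨hl, hr⟩
  subst hl
  induction v with
  | nil => simp [pvCountF]
  | cons r t ih =>
    simp only [pvCountF, List.map_cons, List.sum_cons, List.length_cons]
    have h1 : r.count false ≤ w := by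
      rw [← hr r (by simp)]; exact List.count_le_length
    have h2 : pvCountF t ≤ t.length * w := ih (fun r hrr => hr r (by simp [hrr]))
    calc r.count false + pvCountF t ≤ w + t.length * w := by omega
    _ = (t.length + 1) * w := by ring

theorem pvCountF_set2 (v : List (List Bool)) : ∀ (y x : Nat),
    y < v.length → x < (v.getD y []).length → pvGetB v y x = false →
    pvCountF (pvSet2 v y x true) + 1 = pvCountF v := by
  induction v with
  | nil => simp
  | cons r t ih =>
    intro y x hy hx hf
    cases y with
    | zero =>
      simp only [pvSet2, List.getD_cons_zero, List.set_cons_zero, pvCountF, List.map_cons,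
        List.sum_cons]
      simp only [List.getD_cons_zero] at hx
      simp only [pvGetB, pvGetD2, List.getD_cons_zero] at hf
      have := pv_count_false_set r x hx hf
      omega
    | succ y =>
      have hstep : pvSet2 (r :: t) (y + 1) x true = r :: pvSet2 t y x true := by
        simp [pvSet2, List.set_cons_succ]
      rw [hstep]
      simp only [pvCountF, List.map_cons, List.sum_cons]
      have := ih y x (by simpa using hy) (by simpa using hx)
        (by simpa [pvGetB, pvGetD2] using hf)
      simp only [pvCountF] at this
      omega

def pvClosedAt (O : List (List Int)) (L : Int) (h w : Nat) (v : List (List Bool)) (y x : Nat) : Prop :=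
  ∀ y' x', y' < h → x' < w → pvGet2 O y' x' = L → pvAdj y x y' x' → pvGetB v y' x' = true

def pvAllClosed (O : List (List Int)) (L : Int) (h w : Nat) (v : List (List Bool)) : Prop :=
  ∀ y x, pvGetB v y x = true → pvClosedAt O L h w v y x

theorem pvClosedAt_mono (O : List (List Int)) (L : Int) (h w : Nat)
    (v v' : List (List Bool)) (y x : Nat)
    (hsub : ∀ y' x', pvGetB v y' x' = true → pvGetB v' y' x' = true)
    (hc : pvClosedAt O L h w v y x) : pvClosedAt O L h w v' y x :=
  fun y' x' h1 h2 h3 h4 => hsub y' x' (hc y' x' h1 h2 h3 h4)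

def pvQOk (h w : Nat) (v : List (List Bool)) (q : List (Int × Int)) : Prop :=
  ∀ c ∈ q, 0 ≤ c.1 ∧ c.1 < (w : Int) ∧ 0 ≤ c.2 ∧ c.2 < (h : Int) ∧
    pvGetB v c.2.toNat c.1.toNat = true

def pvGOk (O g : List (List Int)) (v : List (List Bool)) : Prop :=
  ∀ y x, pvGetB v y x = false → pvGet2 g y x = pvGet2 O y x

def pvTrOk (h w : Nat) (tr : List (Int × Int)) : Prop :=
  ∀ c ∈ tr, 0 ≤ c.1 ∧ c.1 < (w : Int) ∧ 0 ≤ c.2 ∧ c.2 < (h : Int)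

def pvTrInv (v0 v : List (List Bool)) (tr : List (Int × Int)) : Prop :=
  ∀ y x, pvGetB v y x = true ↔
    (pvGetB v0 y x = true ∨ ∃ c ∈ tr, c.2.toNat = y ∧ c.1.toNat = x)

-- everything one pvBfsStep does
theorem pvBfsStep_facts (O g : List (List Int)) (L : Int) (h w : Nat)
    (v0 : List (List Bool)) (cx cy : Int) (d : Int × Int)
    (hd : d = ((0:Int),(1:Int)) ∨ d = ((0:Int),(-1:Int)) ∨ d = ((1:Int),(0:Int)) ∨ d = ((-1:Int),(0:Int)))
    (hcx0 : 0 ≤ cx) (hcxw : cx < (w : Int)) (hcy0 : 0 ≤ cy) (hcyh : cy < (h : Int))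
    (hcR : pvReach O L h w cy.toNat cx.toNat)
    (s : List (Int × Int) × List (List Bool) × List (Int × Int))
    (sh : pvShapeB h w s.2.1) (snd : pvSound O L h w s.2.1)
    (qok : pvQOk h w s.2.1 s.1) (gok : pvGOk O g s.2.1)
    (trok : pvTrOk h w s.2.2) (trinv : pvTrInv v0 s.2.1 s.2.2)
    (qcx : ∀ y x, pvGetB s.2.1 y x = true →
      (∃ c ∈ s.1, c.2.toNat = y ∧ c.1.toNat = x) ∨ pvClosedAt O L h w s.2.1 y x ∨
      (y = cy.toNat ∧ x = cx.toNat)) :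
    pvShapeB h w (pvBfsStep g L (w : Int) (h : Int) cx cy s d).2.1 ∧
    pvSound O L h w (pvBfsStep g L (w : Int) (h : Int) cx cy s d).2.1 ∧
    pvQOk h w (pvBfsStep g L (w : Int) (h : Int) cx cy s d).2.1 (pvBfsStep g L (w : Int) (h : Int) cx cy s d).1 ∧
    pvGOk O g (pvBfsStep g L (w : Int) (h : Int) cx cy s d).2.1 ∧
    pvTrOk h w (pvBfsStep g L (w : Int) (h : Int) cx cy s d).2.2 ∧
    pvTrInv v0 (pvBfsStep g L (w : Int) (h : Int) cx cy s d).2.1 (pvBfsStep g L (w : Int) (h : Int) cx cy s d).2.2 ∧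
    (∀ y x, pvGetB s.2.1 y x = true → pvGetB (pvBfsStep g L (w : Int) (h : Int) cx cy s d).2.1 y x = true) ∧
    (∀ c ∈ s.1, c ∈ (pvBfsStep g L (w : Int) (h : Int) cx cy s d).1) ∧
    (2 * pvCountF (pvBfsStep g L (w : Int) (h : Int) cx cy s d).2.1 + (pvBfsStep g L (w : Int) (h : Int) cx cy s d).1.length ≤
      2 * pvCountF s.2.1 + s.1.length) ∧
    (∀ y x, pvGetB (pvBfsStep g L (w : Int) (h : Int) cx cy s d).2.1 y x = true →
      (∃ c ∈ (pvBfsStep g L (w : Int) (h : Int) cx cy s d).1, c.2.toNat = y ∧ c.1.toNat = x) ∨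
      pvClosedAt O L h w (pvBfsStep g L (w : Int) (h : Int) cx cy s d).2.1 y x ∨
      (y = cy.toNat ∧ x = cx.toNat)) ∧
    (0 ≤ cx + d.1 → cx + d.1 < (w : Int) → 0 ≤ cy + d.2 → cy + d.2 < (h : Int) →
      pvGet2 O (cy + d.2).toNat (cx + d.1).toNat = L →
      pvGetB (pvBfsStep g L (w : Int) (h : Int) cx cy s d).2.1 (cy + d.2).toNat (cx + d.1).toNat = true) := by
  by_cases hb : 0 ≤ cx + d.1 ∧ cx + d.1 < (w : Int) ∧ 0 ≤ cy + d.2 ∧ cy + d.2 < (h : Int)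
  case neg =>
    have hr : pvBfsStep g L (w : Int) (h : Int) cx cy s d = s := by
      simp only [pvBfsStep, if_neg hb]
    rw [hr]
    refine ⟨sh, snd, qok, gok, trok, trinv, fun _ _ hv => hv, fun _ hc => hc, le_refl _, qcx, ?_⟩
    intro h1 h2 h3 h4 _
    exact absurd ⟨h1, h2, h3, h4⟩ hb
  case pos =>
  by_cases hguard : ¬ (pvGetB s.2.1 (cy + d.2).toNat (cx + d.1).toNat = true) ∧
      pvGet2 g (cy + d.2).toNat (cx + d.1).toNat = L
  case neg =>
    have hr : pvBfsStep g L (w : Int) (h : Int) cx cy s d = s := by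
      simp only [pvBfsStep, if_pos hb, if_neg hguard]
    rw [hr]
    refine ⟨sh, snd, qok, gok, trok, trinv, fun _ _ hv => hv, fun _ hc => hc, le_refl _, qcx, ?_⟩
    intro _ _ _ _ hl
    rcases Bool.eq_false_or_eq_true (pvGetB s.2.1 (cy + d.2).toNat (cx + d.1).toNat) with hv | hv
    · exact hv
    · exfalso
      exact hguard ⟨by simp [hv], by rw [gok _ _ hv]; exact hl⟩
  case pos =>
  have hnx0 := hb.1
  have hnxw := hb.2.1
  have hny0 := hb.2.2.1
  have hnyh := hb.2.2.2
  have hr : pvBfsStep g L (w : Int) (h : Int) cx cy s d =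
      (s.1 ++ [(cx + d.1, cy + d.2)],
       pvSet2 s.2.1 (cy + d.2).toNat (cx + d.1).toNat true,
       s.2.2 ++ [(cx + d.1, cy + d.2)]) := by
    simp only [pvBfsStep, if_pos hb, if_pos hguard]
  have hvinb : (cy + d.2).toNat < s.2.1.length ∧
      (cx + d.1).toNat < (s.2.1.getD (cy + d.2).toNat []).length := by
    constructor
    · rw [sh.1]; omega
    · rw [pvShapeB_rowlen h w s.2.1 sh _ (by omega)]; omega
  have hvf : pvGetB s.2.1 (cy + d.2).toNat (cx + d.1).toNat = false := by
    rcases Bool.eq_false_or_eq_true (pvGetB s.2.1 (cy + d.2).toNat (cx + d.1).toNat) with hv | hv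
    · exact absurd hv hguard.1
    · exact hv
  have hOl : pvGet2 O (cy + d.2).toNat (cx + d.1).toNat = L := by
    rw [← gok _ _ hvf]; exact hguard.2
  have hAdj : pvAdj cy.toNat cx.toNat (cy + d.2).toNat (cx + d.1).toNat := by
    rcases hd with rfl | rfl | rfl | rfl
    · exact Or.inr ⟨by omega, Or.inl (by omega)⟩
    · exact Or.inr ⟨by omega, Or.inr (by omega)⟩
    · exact Or.inl ⟨by omega, Or.inl (by omega)⟩
    · exact Or.inl ⟨by omega, Or.inr (by omega)⟩
  have hmono : ∀ y x, pvGetB s.2.1 y x = true →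
      pvGetB (pvSet2 s.2.1 (cy + d.2).toNat (cx + d.1).toNat true) y x = true :=
    fun y x hv => pvGetB_set2_mono _ _ _ _ _ hv
  have hself : pvGetB (pvSet2 s.2.1 (cy + d.2).toNat (cx + d.1).toNat true)
      (cy + d.2).toNat (cx + d.1).toNat = true :=
    pvGetB_set2_self h w s.2.1 sh _ _ (by omega) (by omega)
  have hnew : ∀ y x, pvGetB (pvSet2 s.2.1 (cy + d.2).toNat (cx + d.1).toNat true) y x = true →
      pvGetB s.2.1 y x = true ∨ (y = (cy + d.2).toNat ∧ x = (cx + d.1).toNat) := by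
    intro y x hv
    rw [pvGetB_set2] at hv
    by_cases he : (cy + d.2).toNat = y ∧ (cx + d.1).toNat = x ∧
        (cy + d.2).toNat < s.2.1.length ∧ (cx + d.1).toNat < (s.2.1.getD (cy + d.2).toNat []).length
    · exact Or.inr ⟨he.1.symm, he.2.1.symm⟩
    · rw [if_neg he] at hv
      exact Or.inl hv
  rw [hr]
  refine ⟨pvShapeB_set2 h w s.2.1 _ _ true sh, ?_, ?_, ?_, ?_, ?_, hmono, ?_, ?_, ?_, ?_⟩
  · -- sound
    intro y x hv
    rcases hnew y x hv with hv' | ⟨rfl, rfl⟩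
    · exact snd _ _ hv'
    · exact pvReach.step hcR (by omega) (by omega) hOl hAdj
  · -- qok
    intro c hc
    rcases List.mem_append.mp hc with hcm | hcm
    · obtain ⟨a1, a2, a3, a4, a5⟩ := qok c hcm
      exact ⟨a1, a2, a3, a4, hmono _ _ a5⟩
    · simp only [List.mem_singleton] at hcm
      subst hcm
      exact ⟨hnx0, hnxw, hny0, hnyh, hself⟩
  · -- gok
    intro y x hv
    refine gok y x ?_
    rcases Bool.eq_false_or_eq_true (pvGetB s.2.1 y x) with hv' | hv'
    · rw [hmono _ _ hv'] at hv
      simp at hv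
    · exact hv'
  · -- trok
    intro c hc
    rcases List.mem_append.mp hc with hcm | hcm
    · exact trok c hcm
    · simp only [List.mem_singleton] at hcm
      subst hcm
      exact ⟨hnx0, hnxw, hny0, hnyh⟩
  · -- trinv
    intro y x
    constructor
    · intro hv
      rcases hnew y x hv with hv' | ⟨rfl, rfl⟩
      · rcases (trinv y x).mp hv' with h1 | ⟨c, hc1, hc2⟩
        · exact Or.inl h1
        · exact Or.inr ⟨c, List.mem_append.mpr (Or.inl hc1), hc2⟩
      · exact Or.inr ⟨(cx + d.1, cy + d.2), List.mem_append.mpr (Or.inr (by simp)), rfl, rfl⟩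
    · intro hv
      rcases hv with h1 | ⟨c, hc1, hc2⟩
      · exact hmono _ _ ((trinv y x).mpr (Or.inl h1))
      · rcases List.mem_append.mp hc1 with hcm | hcm
        · exact hmono _ _ ((trinv y x).mpr (Or.inr ⟨c, hcm, hc2⟩))
        · simp only [List.mem_singleton] at hcm
          subst hcm
          rw [← hc2.1, ← hc2.2]
          exact hself
  · -- queue preserved
    intro c hc
    exact List.mem_append.mpr (Or.inl hc)
  · -- measure
    simp only [List.length_append, List.length_singleton]
    have := pvCountF_set2 s.2.1 _ _ hvinb.1 hvinb.2 hvf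
    omega
  · -- qcx
    intro y x hv
    rcases hnew y x hv with hv' | ⟨rfl, rfl⟩
    · rcases qcx y x hv' with ⟨c, hc1, hc2⟩ | hcl | hp
      · exact Or.inl ⟨c, List.mem_append.mpr (Or.inl hc1), hc2⟩
      · exact Or.inr (Or.inl (pvClosedAt_mono O L h w _ _ y x hmono hcl))
      · exact Or.inr (Or.inr hp)
    · exact Or.inl ⟨(cx + d.1, cy + d.2), List.mem_append.mpr (Or.inr (by simp)), rfl, rfl⟩
  · -- directional
    intro _ _ _ _ _
    exact hself

theorem pvBfsLoop_facts (O g : List (List Int)) (L : Int) (h w : Nat) (v0 : List (List Bool)) :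
    ∀ (fuel : Nat) (q : List (Int × Int)) (v : List (List Bool)) (tr : List (Int × Int)),
    pvShapeB h w v → pvSound O L h w v → pvQOk h w v q →
    (∀ y x, pvGetB v y x = true →
      (∃ c ∈ q, c.2.toNat = y ∧ c.1.toNat = x) ∨ pvClosedAt O L h w v y x) →
    pvGOk O g v → pvTrOk h w tr → pvTrInv v0 v tr →
    2 * pvCountF v + q.length ≤ fuel →
    pvShapeB h w (pvBfsLoop g L (w : Int) (h : Int) fuel q v tr).1 ∧
    pvSound O L h w (pvBfsLoop g L (w : Int) (h : Int) fuel q v tr).1 ∧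
    (∀ y x, pvGetB v y x = true → pvGetB (pvBfsLoop g L (w : Int) (h : Int) fuel q v tr).1 y x = true) ∧
    pvAllClosed O L h w (pvBfsLoop g L (w : Int) (h : Int) fuel q v tr).1 ∧
    pvTrOk h w (pvBfsLoop g L (w : Int) (h : Int) fuel q v tr).2 ∧
    pvTrInv v0 (pvBfsLoop g L (w : Int) (h : Int) fuel q v tr).1 (pvBfsLoop g L (w : Int) (h : Int) fuel q v tr).2 := by
  intro fuel
  induction fuel with
  | zero =>
    intro q v tr sh snd qok qcl gok trok trinv hfuel
    have hq : q = [] := by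
      cases q with
      | nil => rfl
      | cons a q => simp [List.length_cons] at hfuel
    subst hq
    refine ⟨sh, snd, fun _ _ hv => hv, ?_, trok, trinv⟩
    intro y x hv
    rcases qcl y x hv with ⟨c, hc, -⟩ | hcl
    · simp at hc
    · exact hcl
  | succ fuel ih =>
    intro q v tr sh snd qok qcl gok trok trinv hfuel
    cases q with
    | nil =>
      refine ⟨sh, snd, fun _ _ hv => hv, ?_, trok, trinv⟩
      intro y x hv
      rcases qcl y x hv with ⟨c, hc, -⟩ | hcl
      · simp at hc
      · exact hcl
    | cons c qs =>
      obtain ⟨p1, p2, p3, p4, p5⟩ := qok c (by simp)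
      have hcR : pvReach O L h w c.2.toNat c.1.toNat := snd _ _ p5
      have qok0 : pvQOk h w v qs := fun c' hc' => qok c' (by simp [hc'])
      have qcx0 : ∀ y x, pvGetB v y x = true →
          (∃ c' ∈ qs, c'.2.toNat = y ∧ c'.1.toNat = x) ∨ pvClosedAt O L h w v y x ∨
          (y = c.2.toNat ∧ x = c.1.toNat) := by
        intro y x hv
        rcases qcl y x hv with ⟨c', hc', he'⟩ | hcl
        · rcases List.mem_cons.mp hc' with rfl | hm
          · exact Or.inr (Or.inr ⟨he'.1.symm, he'.2.symm⟩)
          · exact Or.inl ⟨c', hm, he'⟩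
        · exact Or.inr (Or.inl hcl)
      -- chain the four direction steps
      obtain ⟨a1, b1, c1, d1, e1, f1, m1, qp1, me1, qx1, dr1⟩ :=
        pvBfsStep_facts O g L h w v0 c.1 c.2 ((0 : Int), (1 : Int)) (Or.inl rfl)
          p1 p2 p3 p4 hcR (qs, v, tr) sh snd qok0 gok trok trinv qcx0
      obtain ⟨a2, b2, c2, d2, e2, f2, m2, qp2, me2, qx2, dr2⟩ :=
        pvBfsStep_facts O g L h w v0 c.1 c.2 ((0 : Int), (-1 : Int)) (Or.inr (Or.inl rfl))
          p1 p2 p3 p4 hcR _ a1 b1 c1 d1 e1 f1 qx1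
      obtain ⟨a3, b3, c3, d3, e3, f3, m3, qp3, me3, qx3, dr3⟩ :=
        pvBfsStep_facts O g L h w v0 c.1 c.2 ((1 : Int), (0 : Int)) (Or.inr (Or.inr (Or.inl rfl)))
          p1 p2 p3 p4 hcR _ a2 b2 c2 d2 e2 f2 qx2
      obtain ⟨a4, b4, c4, d4, e4, f4, m4, qp4, me4, qx4, dr4⟩ :=
        pvBfsStep_facts O g L h w v0 c.1 c.2 ((-1 : Int), (0 : Int)) (Or.inr (Or.inr (Or.inr rfl)))
          p1 p2 p3 p4 hcR _ a3 b3 c3 d3 e3 f3 qx3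
      -- names for the chained states
      set s1 := pvBfsStep g L (w : Int) (h : Int) c.1 c.2 (qs, v, tr) ((0 : Int), (1 : Int)) with hs1
      set s2 := pvBfsStep g L (w : Int) (h : Int) c.1 c.2 s1 ((0 : Int), (-1 : Int)) with hs2
      set s3 := pvBfsStep g L (w : Int) (h : Int) c.1 c.2 s2 ((1 : Int), (0 : Int)) with hs3
      set s4 := pvBfsStep g L (w : Int) (h : Int) c.1 c.2 s3 ((-1 : Int), (0 : Int)) with hs4
      -- the popped cell is now closed
      have hpc : pvClosedAt O L h w s4.2.1 c.2.toNat c.1.toNat := by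
        intro y' x' hy' hx' hl hadj
        rcases hadj with ⟨hyy, hxx | hxx⟩ | ⟨hxx, hyy | hyy⟩
        · -- x' = cx + 1 : direction (1,0), step 3
          have e1' : (c.2 + (0 : Int)).toNat = y' := by omega
          have e2' : (c.1 + (1 : Int)).toNat = x' := by omega
          refine m4 _ _ ?_
          have := dr3 (by omega) (by omega) (by omega) (by omega)
            (by rw [e1', e2']; exact hl)
          rwa [e1', e2'] at this
        · -- x' + 1 = cx : direction (-1,0), step 4
          have e1' : (c.2 + (0 : Int)).toNat = y' := by omega
          have e2' : (c.1 + (-1 : Int)).toNat = x' := by omega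
          have := dr4 (by omega) (by omega) (by omega) (by omega)
            (by rw [e1', e2']; exact hl)
          rwa [e1', e2'] at this
        · -- y' = cy + 1 : direction (0,1), step 1
          have e1' : (c.2 + (1 : Int)).toNat = y' := by omega
          have e2' : (c.1 + (0 : Int)).toNat = x' := by omega
          refine m4 _ _ (m3 _ _ (m2 _ _ ?_))
          have := dr1 (by omega) (by omega) (by omega) (by omega)
            (by rw [e1', e2']; exact hl)
          rwa [e1', e2'] at this
        · -- y' + 1 = cy : direction (0,-1), step 2
          have e1' : (c.2 + (-1 : Int)).toNat = y' := by omega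
          have e2' : (c.1 + (0 : Int)).toNat = x' := by omega
          refine m4 _ _ (m3 _ _ ?_)
          have := dr2 (by omega) (by omega) (by omega) (by omega)
            (by rw [e1', e2']; exact hl)
          rwa [e1', e2'] at this
      have qcl4 : ∀ y x, pvGetB s4.2.1 y x = true →
          (∃ c' ∈ s4.1, c'.2.toNat = y ∧ c'.1.toNat = x) ∨ pvClosedAt O L h w s4.2.1 y x := by
        intro y x hv
        rcases qx4 y x hv with hc | hcl | ⟨rfl, rfl⟩
        · exact Or.inl hc
        · exact Or.inr hcl
        · exact Or.inr hpc
      have hloop : pvBfsLoop g L (w : Int) (h : Int) (fuel + 1) (c :: qs) v tr =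
          pvBfsLoop g L (w : Int) (h : Int) fuel s4.1 s4.2.1 s4.2.2 := by
        rfl
      have me1' : 2 * pvCountF s1.2.1 + s1.1.length ≤ 2 * pvCountF v + qs.length := me1
      have hfuel4 : 2 * pvCountF s4.2.1 + s4.1.length ≤ fuel := by
        simp only [List.length_cons] at hfuel
        omega
      obtain ⟨g1, g2, g3, g4, g5, g6⟩ := ih s4.1 s4.2.1 s4.2.2 a4 b4 c4 qcl4 d4 e4 f4 hfuel4
      rw [hloop]
      exact ⟨g1, g2, fun y x hv => g3 y x (m4 _ _ (m3 _ _ (m2 _ _ (m1 _ _ hv)))), g4, g5, g6⟩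

theorem pvOverwrite (V : Int) :
    ∀ (tr : List (Int × Int)) (g : List (List Int)),
    (∀ c ∈ tr, 0 ≤ c.1 ∧ 0 ≤ c.2 ∧ c.2.toNat < g.length ∧
      c.1.toNat < (g.getD c.2.toNat []).length) →
    (tr.foldl (fun g c => pvSet2 g c.2.toNat c.1.toNat V) g).length = g.length ∧
    (∀ i, ((tr.foldl (fun g c => pvSet2 g c.2.toNat c.1.toNat V) g).getD i []).length =
      (g.getD i []).length) ∧
    (∀ y x, pvGet2 (tr.foldl (fun g c => pvSet2 g c.2.toNat c.1.toNat V) g) y x =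
      if ∃ c ∈ tr, c.2.toNat = y ∧ c.1.toNat = x then V else pvGet2 g y x) := by
  intro tr
  induction tr with
  | nil =>
    intro g _
    refine ⟨rfl, fun _ => rfl, fun y x => ?_⟩
    rw [if_neg (by simp)]
    rfl
  | cons c tr ih =>
    intro g hb
    obtain ⟨b1, b2, b3, b4⟩ := hb c (by simp)
    simp only [List.foldl_cons]
    obtain ⟨f1, f2, f3⟩ := ih (pvSet2 g c.2.toNat c.1.toNat V) (by
      intro c' hc'
      obtain ⟨d1, d2, d3, d4⟩ := hb c' (by simp [hc'])
      refine ⟨d1, d2, by rw [pvSet2_length]; exact d3, by rw [pvSet2_rowlen]; exact d4⟩)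
    refine ⟨by rw [f1, pvSet2_length], fun i => by rw [f2 i, pvSet2_rowlen], fun y x => ?_⟩
    rw [f3 y x]
    by_cases e1 : ∃ c' ∈ tr, c'.2.toNat = y ∧ c'.1.toNat = x
    · rw [if_pos e1, if_pos ?_]
      obtain ⟨c', hc1, hc2⟩ := e1
      exact ⟨c', by simp [hc1], hc2⟩
    · rw [if_neg e1]
      rw [show pvGet2 (pvSet2 g c.2.toNat c.1.toNat V) y x =
          if c.2.toNat = y ∧ c.1.toNat = x ∧ c.2.toNat < g.length ∧
            c.1.toNat < (g.getD c.2.toNat []).length then V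
          else pvGet2 g y x from pvGetD2_set2 0 V g c.2.toNat c.1.toNat y x]
      by_cases e2 : c.2.toNat = y ∧ c.1.toNat = x
      · rw [if_pos ⟨e2.1, e2.2, b3, b4⟩, if_pos ⟨c, by simp, e2⟩]
      · rw [if_neg (by tauto), if_neg ?_]
        intro hc
        obtain ⟨c', hc1, hc2⟩ := hc
        rcases List.mem_cons.mp hc1 with rfl | hm
        · exact e2 hc2
        · exact e1 ⟨c', hm, hc2⟩

theorem pvBfsRemove_facts (O : List (List Int)) (L V : Int) (h w : Nat)
    (hOlen : O.length = h) (hrow : ∀ i, i < h → w ≤ (O.getD i []).length)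
    (g : List (List Int)) (v : List (List Bool))
    (sh : pvShapeB h w v) (snd : pvSound O L h w v) (acl : pvAllClosed O L h w v)
    (hge : pvShapeEq O g)
    (gval : ∀ y x, pvGet2 g y x = if pvGetB v y x = true then V else pvGet2 O y x)
    (sx sy : Int)
    (hsx0 : 0 ≤ sx) (hsxw : sx < (w : Int)) (hsy0 : 0 ≤ sy) (hsyh : sy < (h : Int))
    (hsb : sy.toNat = 0 ∨ sy.toNat = h - 1 ∨ sx.toNat = 0 ∨ sx.toNat = w - 1)
    (hsnv : pvGetB v sy.toNat sx.toNat = false)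
    (hsl : pvGet2 O sy.toNat sx.toNat = L) :
    pvShapeB h w (pvBfsRemove g v L V (w : Int) (h : Int) (2 * h * w + 1) sx sy).2 ∧
    pvSound O L h w (pvBfsRemove g v L V (w : Int) (h : Int) (2 * h * w + 1) sx sy).2 ∧
    pvAllClosed O L h w (pvBfsRemove g v L V (w : Int) (h : Int) (2 * h * w + 1) sx sy).2 ∧
    pvShapeEq O (pvBfsRemove g v L V (w : Int) (h : Int) (2 * h * w + 1) sx sy).1 ∧
    (∀ y x, pvGet2 (pvBfsRemove g v L V (w : Int) (h : Int) (2 * h * w + 1) sx sy).1 y x =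
      if pvGetB (pvBfsRemove g v L V (w : Int) (h : Int) (2 * h * w + 1) sx sy).2 y x = true then V
      else pvGet2 O y x) ∧
    (∀ y x, pvGetB v y x = true →
      pvGetB (pvBfsRemove g v L V (w : Int) (h : Int) (2 * h * w + 1) sx sy).2 y x = true) ∧
    pvGetB (pvBfsRemove g v L V (w : Int) (h : Int) (2 * h * w + 1) sx sy).2 sy.toNat sx.toNat = true := by
  have hsy' : sy.toNat < h := by omega
  have hsx' : sx.toNat < w := by omega
  have sh1 : pvShapeB h w (pvSet2 v sy.toNat sx.toNat true) :=
    pvShapeB_set2 h w v _ _ true sh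
  have hself : pvGetB (pvSet2 v sy.toNat sx.toNat true) sy.toNat sx.toNat = true :=
    pvGetB_set2_self h w v sh _ _ hsy' hsx'
  have hmono1 : ∀ y x, pvGetB v y x = true →
      pvGetB (pvSet2 v sy.toNat sx.toNat true) y x = true :=
    fun y x hv => pvGetB_set2_mono _ _ _ _ _ hv
  have hnew1 : ∀ y x, pvGetB (pvSet2 v sy.toNat sx.toNat true) y x = true →
      pvGetB v y x = true ∨ (y = sy.toNat ∧ x = sx.toNat) := by
    intro y x hv
    rw [pvGetB_set2] at hv
    by_cases he : sy.toNat = y ∧ sx.toNat = x ∧ sy.toNat < v.length ∧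
        sx.toNat < (v.getD sy.toNat []).length
    · exact Or.inr ⟨he.1.symm, he.2.1.symm⟩
    · rw [if_neg he] at hv
      exact Or.inl hv
  have snd1 : pvSound O L h w (pvSet2 v sy.toNat sx.toNat true) := by
    intro y x hv
    rcases hnew1 y x hv with hv' | ⟨rfl, rfl⟩
    · exact snd _ _ hv'
    · exact pvReach.base hsy' hsx' hsb hsl
  obtain ⟨l1, l2, l3, l4, l5, l6⟩ := pvBfsLoop_facts O g L h w v (2 * h * w + 1)
    [(sx, sy)] (pvSet2 v sy.toNat sx.toNat true) [(sx, sy)]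
    sh1 snd1
    (by
      intro c hc
      simp only [List.mem_singleton] at hc
      subst hc
      exact ⟨hsx0, hsxw, hsy0, hsyh, hself⟩)
    (by
      intro y x hv
      rcases hnew1 y x hv with hv' | ⟨rfl, rfl⟩
      · exact Or.inr (pvClosedAt_mono O L h w v _ y x hmono1 (acl y x hv'))
      · exact Or.inl ⟨(sx, sy), by simp, rfl, rfl⟩)
    (by
      intro y x hv
      have hv' : pvGetB v y x = false := by
        rcases Bool.eq_false_or_eq_true (pvGetB v y x) with ht | ht
        · rw [hmono1 _ _ ht] at hv; simp at hv
        · exact ht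
      rw [gval y x, hv']
      simp)
    (by
      intro c hc
      simp only [List.mem_singleton] at hc
      subst hc
      exact ⟨hsx0, hsxw, hsy0, hsyh⟩)
    (by
      intro y x
      constructor
      · intro hv
        rcases hnew1 y x hv with hv' | ⟨rfl, rfl⟩
        · exact Or.inl hv'
        · exact Or.inr ⟨(sx, sy), by simp, rfl, rfl⟩
      · intro hv
        rcases hv with h1 | ⟨c, hc1, hc2⟩
        · exact hmono1 _ _ h1
        · simp only [List.mem_singleton] at hc1
          subst hc1
          rw [← hc2.1, ← hc2.2]
          exact hself)
    (by
      have := pvCountF_le h w (pvSet2 v sy.toNat sx.toNat true) sh1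
      have h2 : 2 * h * w = 2 * (h * w) := by ring
      simp only [List.length_singleton]
      omega)
  obtain ⟨o1, o2, o3⟩ := pvOverwrite V
    (pvBfsLoop g L (w : Int) (h : Int) (2 * h * w + 1) [(sx, sy)]
      (pvSet2 v sy.toNat sx.toNat true) [(sx, sy)]).2 g
    (by
      intro c hc
      obtain ⟨d1, d2, d3, d4⟩ := l5 c hc
      refine ⟨d1, d3, ?_, ?_⟩
      · rw [hge.1] at hOlen; omega
      · rw [← hge.2 c.2.toNat]
        have : c.2.toNat < h := by omega
        have h1 := hrow c.2.toNat this
        omega)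
  have hrem : pvBfsRemove g v L V (w : Int) (h : Int) (2 * h * w + 1) sx sy =
      ((pvBfsLoop g L (w : Int) (h : Int) (2 * h * w + 1) [(sx, sy)]
          (pvSet2 v sy.toNat sx.toNat true) [(sx, sy)]).2.foldl
        (fun g c => pvSet2 g c.2.toNat c.1.toNat V) g,
       (pvBfsLoop g L (w : Int) (h : Int) (2 * h * w + 1) [(sx, sy)]
          (pvSet2 v sy.toNat sx.toNat true) [(sx, sy)]).1) := rfl
  rw [hrem]
  refine ⟨l1, l2, l4, ⟨by rw [o1, hge.1], fun i => by rw [o2 i, hge.2 i]⟩, ?_, ?_, ?_⟩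
  · -- the value description of the written grid
    intro y x
    rw [o3 y x]
    by_cases e1 : ∃ c ∈ (pvBfsLoop g L (w : Int) (h : Int) (2 * h * w + 1) [(sx, sy)]
        (pvSet2 v sy.toNat sx.toNat true) [(sx, sy)]).2, c.2.toNat = y ∧ c.1.toNat = x
    · rw [if_pos e1, if_pos ((l6 y x).mpr (Or.inr e1))]
    · rw [if_neg e1, gval y x]
      rcases Bool.eq_false_or_eq_true (pvGetB v y x) with ht | ht
      · simp [ht, (l6 y x).mpr (Or.inl ht)]
      · rw [ht]
        have hv2 : pvGetB (pvBfsLoop g L (w : Int) (h : Int) (2 * h * w + 1) [(sx, sy)]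
            (pvSet2 v sy.toNat sx.toNat true) [(sx, sy)]).1 y x = false := by
          rcases Bool.eq_false_or_eq_true (pvGetB (pvBfsLoop g L (w : Int) (h : Int)
              (2 * h * w + 1) [(sx, sy)] (pvSet2 v sy.toNat sx.toNat true) [(sx, sy)]).1 y x)
            with ht2 | ht2
          · rcases (l6 y x).mp ht2 with h1 | h1
            · rw [h1] at ht; simp at ht
            · exact absurd h1 e1
          · exact ht2
        rw [hv2]
  · intro y x hv
    exact l3 y x (hmono1 _ _ hv)
  · exact l3 _ _ hself

theorem pvVisited0 (h w y x : Nat) :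
    pvGetB (List.replicate h (List.replicate w false)) y x = false := by
  simp only [pvGetB, pvGetD2]
  rw [pv_getD_replicate]
  split
  · rw [pv_getD_replicate]
    split <;> rfl
  · simp

theorem pvVisited0_shape (h w : Nat) :
    pvShapeB h w (List.replicate h (List.replicate w false)) := by
  refine ⟨by simp, fun r hr => ?_⟩
  rw [List.eq_of_mem_replicate hr]
  simp

-- A's edge-tile list (exactly the term the port builds)
def pvEdgeTiles (O : List (List Int)) (L : Int) (h w : Nat) : List (Int × Int) :=
  (List.range h).foldl (fun acc y => acc ++
      ((if pvGet2 O y 0 = L ∧ ¬ (pvGetB (List.replicate h (List.replicate w false)) y 0 = true)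
        then [((0 : Int), (y : Int))] else []) ++
       (if pvGet2 O y (w - 1) = L ∧ ¬ (pvGetB (List.replicate h (List.replicate w false)) y (w - 1) = true)
        then [(((w : Int) - 1), (y : Int))] else [])))
    ((List.range w).foldl (fun acc x => acc ++
      ((if pvGet2 O 0 x = L ∧ ¬ (pvGetB (List.replicate h (List.replicate w false)) 0 x = true)
        then [((x : Int), (0 : Int))] else []) ++
       (if pvGet2 O (h - 1) x = L ∧ ¬ (pvGetB (List.replicate h (List.replicate w false)) (h - 1) x = true)
        then [((x : Int), ((h : Int) - 1))] else []))) [])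

theorem pvEdgeTiles_eq (O : List (List Int)) (L : Int) (h w : Nat) :
    pvEdgeTiles O L h w =
      (List.range w).flatMap (fun x =>
        (if pvGet2 O 0 x = L ∧ ¬ (pvGetB (List.replicate h (List.replicate w false)) 0 x = true)
          then [((x : Int), (0 : Int))] else []) ++
        (if pvGet2 O (h - 1) x = L ∧ ¬ (pvGetB (List.replicate h (List.replicate w false)) (h - 1) x = true)
          then [((x : Int), ((h : Int) - 1))] else [])) ++
      (List.range h).flatMap (fun y =>
        (if pvGet2 O y 0 = L ∧ ¬ (pvGetB (List.replicate h (List.replicate w false)) y 0 = true)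
          then [((0 : Int), (y : Int))] else []) ++
        (if pvGet2 O y (w - 1) = L ∧ ¬ (pvGetB (List.replicate h (List.replicate w false)) y (w - 1) = true)
          then [(((w : Int) - 1), (y : Int))] else [])) := by
  unfold pvEdgeTiles
  rw [PySem.List.foldl_append_eq_flatMap, PySem.List.foldl_append_eq_flatMap]
  simp

theorem pvEdge_mem (O : List (List Int)) (L : Int) (h w : Nat) (hh : 0 < h) (hw : 0 < w) :
    ∀ c ∈ pvEdgeTiles O L h w, 0 ≤ c.1 ∧ c.1 < (w : Int) ∧ 0 ≤ c.2 ∧ c.2 < (h : Int) ∧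
      (c.2.toNat = 0 ∨ c.2.toNat = h - 1 ∨ c.1.toNat = 0 ∨ c.1.toNat = w - 1) := by
  intro c hc
  rw [pvEdgeTiles_eq] at hc
  rcases List.mem_append.mp hc with hm | hm
  · obtain ⟨x, hx, hcm⟩ := List.mem_flatMap.mp hm
    have hxw : x < w := List.mem_range.mp hx
    rcases List.mem_append.mp hcm with hcc | hcc
    · have : c = ((x : Int), (0 : Int)) := by
        by_cases hcond : pvGet2 O 0 x = L ∧
            ¬ (pvGetB (List.replicate h (List.replicate w false)) 0 x = true)
        · rw [if_pos hcond] at hcc; simpa using hcc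
        · rw [if_neg hcond] at hcc; simp at hcc
      subst this
      refine ⟨by omega, by omega, by omega, by omega, Or.inl (by simp)⟩
    · have : c = ((x : Int), ((h : Int) - 1)) := by
        by_cases hcond : pvGet2 O (h - 1) x = L ∧
            ¬ (pvGetB (List.replicate h (List.replicate w false)) (h - 1) x = true)
        · rw [if_pos hcond] at hcc; simpa using hcc
        · rw [if_neg hcond] at hcc; simp at hcc
      subst this
      refine ⟨by omega, by omega, by omega, by omega, Or.inr (Or.inl (by omega))⟩
  · obtain ⟨y, hy, hcm⟩ := List.mem_flatMap.mp hm
    have hyh : y < h := List.mem_range.mp hy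
    rcases List.mem_append.mp hcm with hcc | hcc
    · have : c = ((0 : Int), (y : Int)) := by
        by_cases hcond : pvGet2 O y 0 = L ∧
            ¬ (pvGetB (List.replicate h (List.replicate w false)) y 0 = true)
        · rw [if_pos hcond] at hcc; simpa using hcc
        · rw [if_neg hcond] at hcc; simp at hcc
      subst this
      refine ⟨by omega, by omega, by omega, by omega, Or.inr (Or.inr (Or.inl (by simp)))⟩
    · have : c = (((w : Int) - 1), (y : Int)) := by
        by_cases hcond : pvGet2 O y (w - 1) = L ∧
            ¬ (pvGetB (List.replicate h (List.replicate w false)) y (w - 1) = true)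
        · rw [if_pos hcond] at hcc; simpa using hcc
        · rw [if_neg hcond] at hcc; simp at hcc
      subst this
      refine ⟨by omega, by omega, by omega, by omega, Or.inr (Or.inr (Or.inr (by omega)))⟩

theorem pvEdge_cover (O : List (List Int)) (L : Int) (h w : Nat) :
    ∀ y x, y < h → x < w → (y = 0 ∨ y = h - 1 ∨ x = 0 ∨ x = w - 1) → pvGet2 O y x = L →
      ∃ c ∈ pvEdgeTiles O L h w, c.2.toNat = y ∧ c.1.toNat = x := by
  intro y x hy hx hb hl
  rw [pvEdgeTiles_eq]
  rcases hb with rfl | hb | rfl | hb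
  · refine ⟨((x : Int), (0 : Int)), List.mem_append.mpr (Or.inl ?_), by simp, by simp⟩
    refine List.mem_flatMap.mpr ⟨x, List.mem_range.mpr hx, List.mem_append.mpr (Or.inl ?_)⟩
    rw [if_pos ⟨hl, by rw [pvVisited0]; simp⟩]
    simp
  · subst hb
    refine ⟨((x : Int), ((h : Int) - 1)), List.mem_append.mpr (Or.inl ?_), by omega, by simp⟩
    refine List.mem_flatMap.mpr ⟨x, List.mem_range.mpr hx, List.mem_append.mpr (Or.inr ?_)⟩
    rw [if_pos ⟨hl, by rw [pvVisited0]; simp⟩]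
    simp
  · refine ⟨((0 : Int), (y : Int)), List.mem_append.mpr (Or.inr ?_), by simp, by simp⟩
    refine List.mem_flatMap.mpr ⟨y, List.mem_range.mpr hy, List.mem_append.mpr (Or.inl ?_)⟩
    rw [if_pos ⟨hl, by rw [pvVisited0]; simp⟩]
    simp
  · subst hb
    refine ⟨(((w : Int) - 1), (y : Int)), List.mem_append.mpr (Or.inr ?_), by simp, by omega⟩
    refine List.mem_flatMap.mpr ⟨y, List.mem_range.mpr hy, List.mem_append.mpr (Or.inr ?_)⟩
    rw [if_pos ⟨hl, by rw [pvVisited0]; simp⟩]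
    simp

theorem pvOuterFold_facts (O : List (List Int)) (L V : Int) (h w : Nat)
    (hOlen : O.length = h) (hrow : ∀ i, i < h → w ≤ (O.getD i []).length) :
    ∀ (ts : List (Int × Int)),
    (∀ c ∈ ts, 0 ≤ c.1 ∧ c.1 < (w : Int) ∧ 0 ≤ c.2 ∧ c.2 < (h : Int) ∧
      (c.2.toNat = 0 ∨ c.2.toNat = h - 1 ∨ c.1.toNat = 0 ∨ c.1.toNat = w - 1)) →
    ∀ (g : List (List Int)) (v : List (List Bool)),
    pvShapeB h w v → pvSound O L h w v → pvAllClosed O L h w v → pvShapeEq O g →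
    (∀ y x, pvGet2 g y x = if pvGetB v y x = true then V else pvGet2 O y x) →
    pvShapeB h w (ts.foldl (fun (s : List (List Int) × List (List Bool)) c =>
      if ¬ (pvGetB s.2 c.2.toNat c.1.toNat = true) ∧ pvGet2 s.1 c.2.toNat c.1.toNat = L
      then pvBfsRemove s.1 s.2 L V (w : Int) (h : Int) (2 * h * w + 1) c.1 c.2
      else s) (g, v)).2 ∧
    pvSound O L h w (ts.foldl (fun (s : List (List Int) × List (List Bool)) c =>
      if ¬ (pvGetB s.2 c.2.toNat c.1.toNat = true) ∧ pvGet2 s.1 c.2.toNat c.1.toNat = L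
      then pvBfsRemove s.1 s.2 L V (w : Int) (h : Int) (2 * h * w + 1) c.1 c.2
      else s) (g, v)).2 ∧
    pvAllClosed O L h w (ts.foldl (fun (s : List (List Int) × List (List Bool)) c =>
      if ¬ (pvGetB s.2 c.2.toNat c.1.toNat = true) ∧ pvGet2 s.1 c.2.toNat c.1.toNat = L
      then pvBfsRemove s.1 s.2 L V (w : Int) (h : Int) (2 * h * w + 1) c.1 c.2
      else s) (g, v)).2 ∧
    pvShapeEq O (ts.foldl (fun (s : List (List Int) × List (List Bool)) c =>
      if ¬ (pvGetB s.2 c.2.toNat c.1.toNat = true) ∧ pvGet2 s.1 c.2.toNat c.1.toNat = L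
      then pvBfsRemove s.1 s.2 L V (w : Int) (h : Int) (2 * h * w + 1) c.1 c.2
      else s) (g, v)).1 ∧
    (∀ y x, pvGet2 (ts.foldl (fun (s : List (List Int) × List (List Bool)) c =>
      if ¬ (pvGetB s.2 c.2.toNat c.1.toNat = true) ∧ pvGet2 s.1 c.2.toNat c.1.toNat = L
      then pvBfsRemove s.1 s.2 L V (w : Int) (h : Int) (2 * h * w + 1) c.1 c.2
      else s) (g, v)).1 y x =
      if pvGetB (ts.foldl (fun (s : List (List Int) × List (List Bool)) c =>
        if ¬ (pvGetB s.2 c.2.toNat c.1.toNat = true) ∧ pvGet2 s.1 c.2.toNat c.1.toNat = L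
        then pvBfsRemove s.1 s.2 L V (w : Int) (h : Int) (2 * h * w + 1) c.1 c.2
        else s) (g, v)).2 y x = true then V else pvGet2 O y x) ∧
    (∀ y x, pvGetB v y x = true → pvGetB (ts.foldl (fun (s : List (List Int) × List (List Bool)) c =>
      if ¬ (pvGetB s.2 c.2.toNat c.1.toNat = true) ∧ pvGet2 s.1 c.2.toNat c.1.toNat = L
      then pvBfsRemove s.1 s.2 L V (w : Int) (h : Int) (2 * h * w + 1) c.1 c.2
      else s) (g, v)).2 y x = true) ∧
    (∀ c ∈ ts, pvGet2 O c.2.toNat c.1.toNat = L →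
      pvGetB (ts.foldl (fun (s : List (List Int) × List (List Bool)) c =>
        if ¬ (pvGetB s.2 c.2.toNat c.1.toNat = true) ∧ pvGet2 s.1 c.2.toNat c.1.toNat = L
        then pvBfsRemove s.1 s.2 L V (w : Int) (h : Int) (2 * h * w + 1) c.1 c.2
        else s) (g, v)).2 c.2.toNat c.1.toNat = true) := by
  intro ts
  induction ts with
  | nil =>
    intro _ g v sh snd acl hge gval
    refine ⟨sh, snd, acl, hge, gval, fun _ _ hv => hv, ?_⟩
    intro c hc
    simp at hc
  | cons c ts ih =>
    intro hts g v sh snd acl hge gval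
    obtain ⟨b1, b2, b3, b4, b5⟩ := hts c (by simp)
    simp only [List.foldl_cons]
    by_cases hguard : ¬ (pvGetB v c.2.toNat c.1.toNat = true) ∧
        pvGet2 g c.2.toNat c.1.toNat = L
    · rw [if_pos hguard]
      have hnv : pvGetB v c.2.toNat c.1.toNat = false := by
        rcases Bool.eq_false_or_eq_true (pvGetB v c.2.toNat c.1.toNat) with ht | ht
        · exact absurd ht hguard.1
        · exact ht
      have hOl : pvGet2 O c.2.toNat c.1.toNat = L := by
        have := gval c.2.toNat c.1.toNat
        rw [hnv] at this
        simp only [Bool.false_eq_true, if_false] at this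
        rw [← this]
        exact hguard.2
      obtain ⟨r1, r2, r3, r4, r5, r6, r7⟩ :=
        pvBfsRemove_facts O L V h w hOlen hrow g v sh snd acl hge gval c.1 c.2
          b1 b2 b3 b4 b5 hnv hOl
      obtain ⟨f1, f2, f3, f4, f5, f6, f7⟩ :=
        ih (fun c' hc' => hts c' (by simp [hc'])) _ _ r1 r2 r3 r4 r5
      refine ⟨f1, f2, f3, f4, f5, fun y x hv => f6 y x (r6 y x hv), ?_⟩
      intro c' hc' hOl'
      rcases List.mem_cons.mp hc' with rfl | hm
      · exact f6 _ _ r7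
      · exact f7 c' hm hOl'
    · rw [if_neg hguard]
      obtain ⟨f1, f2, f3, f4, f5, f6, f7⟩ :=
        ih (fun c' hc' => hts c' (by simp [hc'])) g v sh snd acl hge gval
      refine ⟨f1, f2, f3, f4, f5, f6, ?_⟩
      intro c' hc' hOl'
      rcases List.mem_cons.mp hc' with rfl | hm
      · -- the tile was skipped: it must already be visited
        rcases Bool.eq_false_or_eq_true (pvGetB v c'.2.toNat c'.1.toNat) with ht | ht
        · exact f6 _ _ ht
        · exfalso
          refine hguard ⟨by simp [ht], ?_⟩
          have := gval c'.2.toNat c'.1.toNat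
          rw [ht] at this
          simp only [Bool.false_eq_true, if_false] at this
          rw [this]
          exact hOl'
      · exact f7 c' hm hOl'

theorem pvA_char (grid : List (List Int)) (L V : Int)
    (pre : Pre_remove_edge_islands grid L V) :
    pvShapeEq grid (remove_edge_islands grid L V) ∧
    (∀ y x, pvReach grid L grid.length (grid.getD 0 []).length y x →
      pvGet2 (remove_edge_islands grid L V) y x = V) ∧
    (∀ y x, ¬ pvReach grid L grid.length (grid.getD 0 []).length y x →
      pvGet2 (remove_edge_islands grid L V) y x = pvGet2 grid y x) := by
  obtain ⟨hpos, hwpos, hrows⟩ := pre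
  have hrow : ∀ i, i < grid.length → (grid.getD 0 []).length ≤ (grid.getD i []).length := by
    intro i hi
    refine hrows _ ?_
    rw [List.getD_eq_getElem _ _ hi]
    exact List.getElem_mem hi
  have heq : remove_edge_islands grid L V =
      ((pvEdgeTiles grid L grid.length (grid.getD 0 []).length).foldl
        (fun (s : List (List Int) × List (List Bool)) c =>
          if ¬ (pvGetB s.2 c.2.toNat c.1.toNat = true) ∧ pvGet2 s.1 c.2.toNat c.1.toNat = L
          then pvBfsRemove s.1 s.2 L V ((grid.getD 0 []).length : Int) ((grid.length : Nat) : Int)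
            (2 * grid.length * (grid.getD 0 []).length + 1) c.1 c.2
          else s)
        (grid, List.replicate grid.length
          (List.replicate (grid.getD 0 []).length false))).1 := rfl
  have sound0 : pvSound grid L grid.length (grid.getD 0 []).length
      (List.replicate grid.length (List.replicate (grid.getD 0 []).length false)) := by
    intro y x hv
    rw [pvVisited0] at hv
    simp at hv
  have acl0 : pvAllClosed grid L grid.length (grid.getD 0 []).length
      (List.replicate grid.length (List.replicate (grid.getD 0 []).length false)) := by
    intro y x hv
    rw [pvVisited0] at hv
    simp at hv
  have gval0 : ∀ y x, pvGet2 grid y x =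
      if pvGetB (List.replicate grid.length
        (List.replicate (grid.getD 0 []).length false)) y x = true then V
      else pvGet2 grid y x := by
    intro y x
    rw [pvVisited0]
    simp
  obtain ⟨f1, f2, f3, f4, f5, f6, f7⟩ :=
    pvOuterFold_facts grid L V grid.length (grid.getD 0 []).length rfl hrow
      (pvEdgeTiles grid L grid.length (grid.getD 0 []).length)
      (pvEdge_mem grid L grid.length (grid.getD 0 []).length hpos hwpos)
      grid (List.replicate grid.length (List.replicate (grid.getD 0 []).length false))
      (pvVisited0_shape grid.length (grid.getD 0 []).length) sound0 acl0
      (pvShapeEq_refl grid) gval0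
  have hRtoV : ∀ y x, pvReach grid L grid.length (grid.getD 0 []).length y x →
      pvGetB ((pvEdgeTiles grid L grid.length (grid.getD 0 []).length).foldl
        (fun (s : List (List Int) × List (List Bool)) c =>
          if ¬ (pvGetB s.2 c.2.toNat c.1.toNat = true) ∧ pvGet2 s.1 c.2.toNat c.1.toNat = L
          then pvBfsRemove s.1 s.2 L V ((grid.getD 0 []).length : Int) ((grid.length : Nat) : Int)
            (2 * grid.length * (grid.getD 0 []).length + 1) c.1 c.2
          else s)
        (grid, List.replicate grid.length
          (List.replicate (grid.getD 0 []).length false))).2 y x = true := by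
    intro y x hr
    induction hr with
    | base hy hx hb hl =>
      rename_i y' x'
      obtain ⟨c, hc, e1, e2⟩ :=
        pvEdge_cover grid L grid.length (grid.getD 0 []).length y' x' hy hx hb hl
      have := f7 c hc (by rw [e1, e2]; exact hl)
      rwa [e1, e2] at this
    | step hr hy' hx' hl hadj ihr =>
      rename_i yc xc yd xd
      exact f3 yc xc ihr yd xd hy' hx' hl hadj
  refine ⟨by rw [heq]; exact f4, ?_, ?_⟩
  · intro y x hr
    rw [heq, f5 y x, if_pos (hRtoV y x hr)]
  · intro y x hr
    rw [heq, f5 y x, if_neg ?_]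
    intro hv
    exact hr (f2 y x hv)

-- ===== VERDICT (by name: the statement is the Claim_ definition above) =====
theorem remove_edge_islands_spec : Claim_equal_remove_edge_islands := by
  unfold Claim_equal_remove_edge_islands
  intro grid land_value void_value _ hpre
  unfold Spec_remove_edge_islands
  obtain ⟨a1, a2, a3⟩ := pvA_char grid land_value void_value hpre
  obtain ⟨b1, b2, b3⟩ := pvB_char grid land_value void_value hpre
  refine pvGrid_ext _ _ (a1.1.symm.trans b1.1) (fun i => (a1.2 i).symm.trans (b1.2 i)) ?_
  intro y x
  by_cases hr : pvReach grid land_value grid.length (grid.getD 0 []).length y x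
  · rw [a2 y x hr, b2 y x hr]
  · rw [a3 y x hr, b3 y x hr]
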